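-- pv_equiv track=rewrite | github.com/RooTinfinite/leetcode-solutions | solutions/3718-minimum-runes-to-add-to-cast-spell/minimum-runes-to-add-to-cast-spell.py | minRunesToAdd
-- ===== SOURCE A (Python) =====
-- from typing import List
--
-- def minRunesToAdd(n: int, crystals: List[int], flowFrom: List[int], flowTo: List[int]) -> int:
--     adjMap = {i: [] for i in range(n)}
--     transposeMap = {i: [] for i in range(n)}
--     stack = []
--
--     # Build the original graph and its transpose
--     for src, dsn in zip(flowFrom, flowTo):
--         adjMap[src].append(dsn)
--         transposeMap[dsn].append(src)
--
--     visited = set()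
--     count = 0
--     sccs = []
--
--     # First DFS pass to fill the stack based on finishing times
--     def dfs(node):
--         visited.add(node)
--         for nei in adjMap[node]:
--             if nei not in visited:
--                 dfs(nei)
--         stack.append(node)
--
--     # Second DFS pass on the transposed graph
--     def transposedfs(node, scc):
--         visited.add(node)
--         scc.append(node)
--         for nei in transposeMap[node]:  # Corrected to use transposeMap
--             if nei not in visited:
--                 transposedfs(nei, scc)
--
--     # Step 1: Perform DFS on the original graph to fill the stack
--     for node in range(n):
--         if node not in visited:
--             dfs(node)
--
--     # Step 2: Perform DFS on the transposed graph in reverse finishing time order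
--     visited = set()
--     while stack:
--         node = stack.pop()
--         if node not in visited:
--             scc = []
--             transposedfs(node, scc)
--             sccs.append(scc)
--
--     # Step 3: Map each node to its SCC index
--     scc_map = {}
--     for i, scc in enumerate(sccs):
--         for node in scc:
--             scc_map[node] = i
--
--     # Step 4: Build the DAG of SCCs
--     dag = {node:[]  for node in range(len(sccs))}
--     for node in adjMap:
--         for nei in adjMap[node]:
--             if scc_map[node] != scc_map[nei]:  # Only add edges between different SCCs
--                 dag[scc_map[node]].append(scc_map[nei])
--
--     # Step 5: Calculate indegree for each SCC in the DAG
--     indegree = [0] * n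
--     for node in dag:
--         for nei in dag[node]:
--             indegree[nei] += 1
--
--     # Step 6: Track which SCCs contain crystals
--     crystalComponents = set()
--     for crystal in crystals:
--         crystalComponents.add(scc_map[crystal])
--
--     # Step 7: Count the number of SCCs that need new runes
--     for node in dag:
--         if indegree[node] == 0 and node not in crystalComponents:
--             count += 1
--
--     return count
-- ===== SOURCE B (Python) =====
-- def _iterdfs(graph, start, seen):
--     # Explicit-stack DFS (no recursion). Returns (preorder, postorder) of the
--     # nodes newly visited from `start`; mutates `seen`.
--     seen.add(start)
--     pre = [start]
--     post = []
--     frames = [(start, graph[start])]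
--     while frames:
--         u, rest = frames.pop()
--         if rest:
--             frames.append((u, rest[1:]))
--             v = rest[0]
--             if v not in seen:
--                 seen.add(v)
--                 pre.append(v)
--                 frames.append((v, graph[v]))
--         else:
--             post.append(u)
--     return pre, post
--
--
-- def minRunesToAdd(n, crystals, flowFrom, flowTo):
--     # Iterative Kosaraju: one explicit-stack DFS helper serves both passes,
--     # components are labelled directly during pass 2, and a simple set of
--     # "blocked" component ids (scanned over the raw edge list) replaces the
--     # condensation DAG + indegree bookkeeping.
--     adj = {i: [] for i in range(n)}
--     radj = {i: [] for i in range(n)}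
--     for s, d in zip(flowFrom, flowTo):
--         adj[s].append(d)
--         radj[d].append(s)
--
--     # Pass 1: postorder (finishing) order.
--     seen = set()
--     order = []
--     for s in range(n):
--         if s not in seen:
--             order += _iterdfs(adj, s, seen)[1]
--
--     # Pass 2: label components on the reverse graph, in reverse finishing order.
--     seen = set()
--     comp = {}
--     ncomp = 0
--     for r in reversed(order):
--         if r not in seen:
--             pre, _ = _iterdfs(radj, r, seen)
--             for v in pre:
--                 comp[v] = ncomp
--             ncomp += 1
--
--     # A component needs a rune unless it has an incoming inter-component edge
--     # or holds a crystal.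
--     blocked = set()
--     for s, d in zip(flowFrom, flowTo):
--         if comp[s] != comp[d]:
--             blocked.add(comp[d])
--     for c in crystals:
--         blocked.add(comp[c])
--
--     count = 0
--     for i in range(ncomp):
--         if i not in blocked:
--             count += 1
--     return count
-- ===== Notes on version B (the rewrite author's own statement) =====
-- stated objective: alternative
-- what changed: B replaces A's recursive two-pass Kosaraju with an explicit-stack iterative DFS helper used for both passes, labels components directly during the second pass instead of collecting SCC lists and rebuilding scc_map, and replaces the condensation DAG + indegree arrays by a set of 'blocked' component ids computed in one scan of the edge list.
import Mathlib
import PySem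

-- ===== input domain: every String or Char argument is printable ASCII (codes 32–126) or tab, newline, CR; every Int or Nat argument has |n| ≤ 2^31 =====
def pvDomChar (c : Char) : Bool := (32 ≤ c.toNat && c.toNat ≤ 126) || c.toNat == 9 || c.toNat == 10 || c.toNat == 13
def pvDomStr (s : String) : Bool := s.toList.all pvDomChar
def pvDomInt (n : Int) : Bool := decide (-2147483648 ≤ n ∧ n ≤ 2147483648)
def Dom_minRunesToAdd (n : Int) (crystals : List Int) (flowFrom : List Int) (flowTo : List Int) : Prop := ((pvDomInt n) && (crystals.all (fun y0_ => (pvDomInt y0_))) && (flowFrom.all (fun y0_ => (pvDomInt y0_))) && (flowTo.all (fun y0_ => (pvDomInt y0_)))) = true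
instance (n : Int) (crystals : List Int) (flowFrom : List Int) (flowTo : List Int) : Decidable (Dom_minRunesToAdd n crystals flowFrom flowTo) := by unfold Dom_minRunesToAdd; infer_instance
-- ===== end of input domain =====

-- B replaces A's recursive two-pass Kosaraju by an explicit-stack (iterative) DFS used for
-- both passes, labels components directly during pass 2, and replaces the condensation
-- DAG + indegree bookkeeping by a set of "blocked" component ids scanned off the edge list.

-- ===== PORT A =====
-- helpers shared by both ports: these lines of Python are identical in A and in B
-- ({i: [] for i in range(n)} seeding and the zip(flowFrom, flowTo) edge loop).
def pvSeedDict (m : Int) : PySem.Dict Int (List Int) :=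
  (PySem.List.pyRange 0 m 1).foldl (fun d i => d.insert i ([] : List Int)) PySem.Dict.empty

def pvBuildMaps (n : Int) (ff ft : List Int) :
    PySem.Dict Int (List Int) × PySem.Dict Int (List Int) :=
  (ff.zip ft).foldl
    (fun p e => (p.1.modify e.1 [] (· ++ [e.2]), p.2.modify e.2 [] (· ++ [e.1])))
    (pvSeedDict n, pvSeedDict n)

-- A's recursive `dfs` (state: visited set, `stack` of finishing times); fuel is a
-- totalization artifact only (n+1 always suffices, see the proofs below).
def pvDfsA (adj : PySem.Dict Int (List Int)) (fuel : Nat) (node : Int)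
    (st : PySem.Set Int × List Int) : PySem.Set Int × List Int :=
  match fuel with
  | 0 => st
  | f+1 =>
    let r := (adj.getD node []).foldl
      (fun acc nei => if nei ∈ acc.1 then acc else pvDfsA adj f nei acc)
      (PySem.Set.add st.1 node, st.2)
    (r.1, r.2 ++ [node])

-- A's recursive `transposedfs` (state: visited set, current `scc` list).
def pvTDfsA (tm : PySem.Dict Int (List Int)) (fuel : Nat) (node : Int)
    (st : PySem.Set Int × List Int) : PySem.Set Int × List Int :=
  match fuel with
  | 0 => st
  | f+1 =>
    (tm.getD node []).foldl
      (fun acc nei => if nei ∈ acc.1 then acc else pvTDfsA tm f nei acc)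
      (PySem.Set.add st.1 node, st.2 ++ [node])

def minRunesToAdd (n : Int) (crystals : List Int) (flowFrom : List Int) (flowTo : List Int) : Int :=
  let maps := pvBuildMaps n flowFrom flowTo
  let adjMap := maps.1
  let transposeMap := maps.2
  let fuel := n.toNat + 1
  -- Step 1: DFS on the original graph, filling `stack` by finishing time
  let p1 := (PySem.List.pyRange 0 n 1).foldl
    (fun st node => if node ∈ st.1 then st else pvDfsA adjMap fuel node st)
    (PySem.Set.empty, ([] : List Int))
  -- Step 2: `while stack: node = stack.pop()` processes stack in reverse
  let p2 := p1.2.reverse.foldl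
    (fun (st : PySem.Set Int × List (List Int)) node =>
      if node ∈ st.1 then st
      else
        let r := pvTDfsA transposeMap fuel node (st.1, [])
        (r.1, st.2 ++ [r.2]))
    (PySem.Set.empty, ([] : List (List Int)))
  let sccs := p2.2
  -- Step 3: scc_map
  let sccMap := (PySem.List.enumerate sccs 0).foldl
    (fun d p => p.2.foldl (fun d node => d.insert node p.1) d) PySem.Dict.empty
  -- Step 4: DAG of SCCs
  let dag0 := pvSeedDict (PySem.List.len sccs)
  let dag := adjMap.keys.foldl
    (fun dg node => (adjMap.getD node []).foldl
      (fun dg nei =>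
        if sccMap.getD node 0 ≠ sccMap.getD nei 0
        then dg.modify (sccMap.getD node 0) [] (· ++ [sccMap.getD nei 0])
        else dg) dg)
    dag0
  -- Step 5: indegrees
  let indeg0 : List Int := List.replicate n.toNat 0
  let indeg := dag.keys.foldl
    (fun ind node => (dag.getD node []).foldl
      (fun ind nei => PySem.List.pySetD ind nei (PySem.List.pyGetD ind nei 0 + 1)) ind)
    indeg0
  -- Step 6: components holding crystals
  let cc := crystals.foldl (fun s c => PySem.Set.add s (sccMap.getD c 0)) PySem.Set.empty
  -- Step 7: count
  dag.keys.foldl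
    (fun cnt node =>
      if PySem.List.pyGetD indeg node 0 = 0 ∧ node ∉ cc then cnt + 1 else cnt) 0

-- ===== PORT B =====
-- B's `_iterdfs` while-loop over explicit (node, remaining-neighbours) frames; the fuel
-- only totalizes the while loop ((n+1)*(|edges|+2) always suffices, see the proofs).
def pvIterLoop (g : PySem.Dict Int (List Int)) (fuel : Nat)
    (frames : List (Int × List Int)) (seen : PySem.Set Int)
    (pre post : List Int) : PySem.Set Int × List Int × List Int :=
  match fuel, frames with
  | _, [] => (seen, pre, post)
  | 0, _ :: _ => (seen, pre, post)
  | f+1, (u, rest) :: fs =>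
    match rest with
    | [] => pvIterLoop g f fs seen pre (post ++ [u])
    | v :: rest' =>
      if v ∈ seen then pvIterLoop g f ((u, rest') :: fs) seen pre post
      else pvIterLoop g f ((v, g.getD v []) :: (u, rest') :: fs)
        (PySem.Set.add seen v) (pre ++ [v]) post

def pvIterDfs (g : PySem.Dict Int (List Int)) (start : Int) (seen : PySem.Set Int)
    (fuel : Nat) : PySem.Set Int × List Int × List Int :=
  pvIterLoop g fuel [(start, g.getD start [])] (PySem.Set.add seen start) [start] []

def minRunesToAdd_alt (n : Int) (crystals : List Int) (flowFrom : List Int) (flowTo : List Int) : Int :=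
  let maps := pvBuildMaps n flowFrom flowTo
  let adj := maps.1
  let radj := maps.2
  let fuel := (n.toNat + 1) * ((flowFrom.zip flowTo).length + 2)
  -- Pass 1: postorder (finishing) order, iteratively
  let p1 := (PySem.List.pyRange 0 n 1).foldl
    (fun (st : PySem.Set Int × List Int) s =>
      if s ∈ st.1 then st
      else
        let r := pvIterDfs adj s st.1 fuel
        (r.1, st.2 ++ r.2.2))
    (PySem.Set.empty, ([] : List Int))
  -- Pass 2: label components on the reverse graph in reverse finishing order
  let p2 := p1.2.reverse.foldl
    (fun (st : PySem.Set Int × PySem.Dict Int Int × Int) r =>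
      if r ∈ st.1 then st
      else
        let t := pvIterDfs radj r st.1 fuel
        (t.1, t.2.1.foldl (fun d v => d.insert v st.2.2) st.2.1, st.2.2 + 1))
    (PySem.Set.empty, PySem.Dict.empty, (0 : Int))
  let comp := p2.2.1
  let ncomp := p2.2.2
  -- blocked component ids: incoming inter-component edge or crystal
  let bl1 := (flowFrom.zip flowTo).foldl
    (fun bl e =>
      if comp.getD e.1 0 ≠ comp.getD e.2 0 then PySem.Set.add bl (comp.getD e.2 0) else bl)
    PySem.Set.empty
  let blocked := crystals.foldl (fun bl c => PySem.Set.add bl (comp.getD c 0)) bl1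
  (PySem.List.pyRange 0 ncomp 1).foldl
    (fun cnt i => if i ∈ blocked then cnt else cnt + 1) 0

-- ===== PRECONDITION & SPEC =====
-- Pre_: exactly A's no-raise condition: every zipped edge endpoint and every crystal is a
-- node of range(n) (otherwise A's adjMap[...] / scc_map[...] lookups raise KeyError).
def Pre_minRunesToAdd (n : Int) (crystals : List Int) (flowFrom : List Int) (flowTo : List Int) : Prop :=
  (∀ e ∈ flowFrom.zip flowTo, (0 ≤ e.1 ∧ e.1 < n) ∧ (0 ≤ e.2 ∧ e.2 < n)) ∧
  (∀ c ∈ crystals, 0 ≤ c ∧ c < n)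
instance (n : Int) (crystals : List Int) (flowFrom : List Int) (flowTo : List Int) : Decidable (Pre_minRunesToAdd n crystals flowFrom flowTo) := by unfold Pre_minRunesToAdd; infer_instance

def pvWitness_minRunesToAdd : Int × List Int × List Int × List Int := (3, [0], [0, 1, 2], [1, 0, 2])

def Spec_minRunesToAdd (n : Int) (crystals : List Int) (flowFrom : List Int) (flowTo : List Int) (out : Int) : Prop := out = minRunesToAdd_alt n crystals flowFrom flowTo
instance (n : Int) (crystals : List Int) (flowFrom : List Int) (flowTo : List Int) (out : Int) : Decidable (Spec_minRunesToAdd n crystals flowFrom flowTo out) := by unfold Spec_minRunesToAdd; infer_instance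

-- ===== CLAIM (what is proved, stated in full; the proofs are below) =====
def Claim_equal_minRunesToAdd : Prop := ∀ (n : Int) (crystals : List Int) (flowFrom : List Int) (flowTo : List Int), Dom_minRunesToAdd n crystals flowFrom flowTo → Pre_minRunesToAdd n crystals flowFrom flowTo → Spec_minRunesToAdd n crystals flowFrom flowTo (minRunesToAdd n crystals flowFrom flowTo)

-- ===== LEMMAS AND PROOFS =====

-- Generic DFS specification: one recursion carrying (visited, preorder, postorder).
-- A's `dfs` is its (visited, postorder) projection, A's `transposedfs` its
-- (visited, preorder) projection, and B's frame loop simulates it exactly.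
def pvGdfs (g : PySem.Dict Int (List Int)) (fuel : Nat) (node : Int)
    (st : PySem.Set Int × List Int × List Int) : PySem.Set Int × List Int × List Int :=
  match fuel with
  | 0 => st
  | f+1 =>
    let r := (g.getD node []).foldl
      (fun acc nei => if nei ∈ acc.1 then acc else pvGdfs g f nei acc)
      (PySem.Set.add st.1 node, st.2.1 ++ [node], st.2.2)
    (r.1, r.2.1, r.2.2 ++ [node])

def pvGstep (g : PySem.Dict Int (List Int)) (k : Nat)
    (acc : PySem.Set Int × List Int × List Int) (nei : Int) :
    PySem.Set Int × List Int × List Int :=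
  if nei ∈ acc.1 then acc else pvGdfs g k nei acc

def pvUnv (n : Int) (vis : List Int) : Nat :=
  ((PySem.List.pyRange 0 n 1).filter (fun x => decide (x ∉ vis))).length

def pvClosed (n : Int) (g : PySem.Dict Int (List Int)) : Prop :=
  ∀ u v : Int, v ∈ g.getD u [] → 0 ≤ v ∧ v < n

def pvDegLe (g : PySem.Dict Int (List Int)) (D : Nat) : Prop :=
  ∀ u : Int, (g.getD u []).length ≤ D

def pvK (n : Int) : Nat := n.toNat + 1

def pvSccMapOf (sccs : List (List Int)) : PySem.Dict Int Int :=
  (PySem.List.enumerate sccs 0).foldl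
    (fun d p => p.2.foldl (fun d node => d.insert node p.1) d) PySem.Dict.empty

-- pass-level step functions (proof layer)
def pvStep1 (g : PySem.Dict Int (List Int)) (k : Nat)
    (st : PySem.Set Int × List Int) (s : Int) : PySem.Set Int × List Int :=
  if s ∈ st.1 then st
  else ((pvGdfs g k s (st.1, [], [])).1, st.2 ++ (pvGdfs g k s (st.1, [], [])).2.2)

def pvStep2 (g : PySem.Dict Int (List Int)) (k : Nat)
    (st : PySem.Set Int × List (List Int)) (r : Int) : PySem.Set Int × List (List Int) :=
  if r ∈ st.1 then st
  else ((pvGdfs g k r (st.1, [], [])).1, st.2 ++ [(pvGdfs g k r (st.1, [], [])).2.1])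

-- generic paired-fold lemma
theorem pvFoldlRel {α β γ : Type} (R : β → γ → Prop) (f : β → α → β) (g : γ → α → γ) :
    ∀ (l : List α) (b : β) (c : γ), R b c →
      (∀ b c a, a ∈ l → R b c → R (f b a) (g c a)) →
      R (l.foldl f b) (l.foldl g c) := by
  intro l
  induction l with
  | nil => intro b c h _; exact h
  | cons x xs ih =>
    intro b c h hstep
    exact ih _ _ (hstep b c x (by simp) h)
      (fun b c a ha => hstep b c a (by simp [ha]))

theorem pvFoldlInv {α β : Type} (P : β → Prop) (f : β → α → β) :
    ∀ (l : List α) (b : β), P b → (∀ b a, a ∈ l → P b → P (f b a)) → P (l.foldl f b) := by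
  intro l
  induction l with
  | nil => intro b h _; exact h
  | cons x xs ih =>
    intro b h hstep
    exact ih _ (hstep b x (by simp) h) (fun b a ha => hstep b a (by simp [ha]))

theorem pvUnv_le (n : Int) (vis : List Int) : pvUnv n vis ≤ n.toNat := by
  unfold pvUnv
  calc ((PySem.List.pyRange 0 n 1).filter (fun x => decide (x ∉ vis))).length
      ≤ (PySem.List.pyRange 0 n 1).length := List.length_filter_le _ _
    _ = n.toNat := by simp [PySem.List.length_pyRange_one]

theorem pvUnv_anti (n : Int) {vis vis' : List Int}
    (h : ∀ x, x ∈ vis → x ∈ vis') : pvUnv n vis' ≤ pvUnv n vis := by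
  unfold pvUnv
  rw [← List.countP_eq_length_filter, ← List.countP_eq_length_filter]
  refine List.countP_mono_left (fun x _ hx => ?_)
  simp only [decide_eq_true_eq] at hx ⊢
  exact fun hmem => hx (h x hmem)

theorem pvUnv_pos (n : Int) (vis : List Int) (v : Int)
    (h0 : 0 ≤ v) (h1 : v < n) (hv : v ∉ vis) : 0 < pvUnv n vis := by
  unfold pvUnv
  have hmem : v ∈ (PySem.List.pyRange 0 n 1).filter (fun x => decide (x ∉ vis)) := by
    rw [List.mem_filter]
    exact ⟨(PySem.List.mem_pyRange_one).2 ⟨h0, h1⟩, by simpa using hv⟩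
  exact List.length_pos_of_mem hmem

theorem pvUnv_add_lt (n : Int) (vis : List Int) (v : Int)
    (h0 : 0 ≤ v) (h1 : v < n) (hv : v ∉ vis) :
    pvUnv n (PySem.Set.add vis v) < pvUnv n vis := by
  have hadd : PySem.Set.add vis v = vis ++ [v] := PySem.Set.add_of_not_mem hv
  unfold pvUnv
  have hrw : (PySem.List.pyRange 0 n 1).filter (fun x => decide (x ∉ PySem.Set.add vis v))
      = ((PySem.List.pyRange 0 n 1).filter (fun x => decide (x ∉ vis))).filter
          (fun x => decide (x ≠ v)) := by
    rw [List.filter_filter]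
    refine List.filter_congr (fun x _ => ?_)
    rw [hadd]
    by_cases hx1 : x ∈ vis <;> by_cases hx2 : x = v <;> simp [hx1, hx2]
  rw [hrw]
  refine List.length_filter_lt_length_iff_exists.mpr ⟨v, ?_, by simp⟩
  rw [List.mem_filter]
  exact ⟨(PySem.List.mem_pyRange_one).2 ⟨h0, h1⟩, by simpa using hv⟩

-- accumulator bookkeeping: the pre/post accumulators are append-only and independent
theorem pvGdfs_appInv (g : PySem.Dict Int (List Int)) :
    ∀ (f : Nat) (s : Int) (vis : PySem.Set Int) (pre post : List Int),
      pvGdfs g f s (vis, pre, post) =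
        ((pvGdfs g f s (vis, [], [])).1,
         pre ++ (pvGdfs g f s (vis, [], [])).2.1,
         post ++ (pvGdfs g f s (vis, [], [])).2.2) := by
  intro f
  induction f with
  | zero => intro s vis pre post; simp [pvGdfs]
  | succ f ih =>
    intro s vis pre post
    have hrel := pvFoldlRel
      (fun (x y : PySem.Set Int × List Int × List Int) =>
        x.1 = y.1 ∧ x.2.1 = pre ++ y.2.1 ∧ x.2.2 = post ++ y.2.2)
      (fun acc nei => if nei ∈ acc.1 then acc else pvGdfs g f nei acc)
      (fun acc nei => if nei ∈ acc.1 then acc else pvGdfs g f nei acc)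
      (g.getD s []) (PySem.Set.add vis s, pre ++ [s], post)
      (PySem.Set.add vis s, [s], [])
      ⟨rfl, rfl, by simp⟩
      (by
        rintro ⟨b1, b2, b3⟩ ⟨c1, c2, c3⟩ a ha ⟨h1, h2, h3⟩
        simp only at h1 h2 h3
        subst h1 h2 h3
        by_cases hm : a ∈ b1
        · simp [hm]
        · simp only [hm, if_neg, not_false_iff]
          rw [ih a b1 (pre ++ c2) (post ++ c3), ih a b1 c2 c3]
          exact ⟨rfl, by simp, by simp⟩)
    simp only [pvGdfs]
    obtain ⟨h1, h2, h3⟩ := hrel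
    refine Prod.ext ?_ (Prod.ext ?_ ?_) <;> simp only [h1, h2, h3] <;> simp

-- A's dfs is the (visited, postorder) projection of pvGdfs
theorem pvGdfs_projA (g : PySem.Dict Int (List Int)) :
    ∀ (f : Nat) (s : Int) (vis : PySem.Set Int) (pre stk : List Int),
      (pvGdfs g f s (vis, pre, stk)).1 = (pvDfsA g f s (vis, stk)).1 ∧
      (pvGdfs g f s (vis, pre, stk)).2.2 = (pvDfsA g f s (vis, stk)).2 := by
  intro f
  induction f with
  | zero => intro s vis pre stk; simp [pvGdfs, pvDfsA]
  | succ f ih =>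
    intro s vis pre stk
    have hrel := pvFoldlRel
      (fun (x : PySem.Set Int × List Int × List Int) (y : PySem.Set Int × List Int) =>
        x.1 = y.1 ∧ x.2.2 = y.2)
      (fun acc nei => if nei ∈ acc.1 then acc else pvGdfs g f nei acc)
      (fun acc nei => if nei ∈ acc.1 then acc else pvDfsA g f nei acc)
      (g.getD s []) (PySem.Set.add vis s, pre ++ [s], stk)
      (PySem.Set.add vis s, stk)
      ⟨rfl, rfl⟩
      (by
        rintro ⟨b1, b2, b3⟩ ⟨c1, c2⟩ a ha ⟨h1, h2⟩
        simp only at h1 h2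
        subst h1 h2
        by_cases hm : a ∈ b1
        · simp [hm]
        · simp only [hm, if_neg, not_false_iff]
          exact ih a b1 b2 b3)
    obtain ⟨h1, h2⟩ := hrel
    simp only [pvGdfs, pvDfsA]
    exact ⟨by simpa using h1, by simpa using h2⟩

-- A's transposedfs is the (visited, preorder) projection of pvGdfs
theorem pvGdfs_projT (g : PySem.Dict Int (List Int)) :
    ∀ (f : Nat) (s : Int) (vis : PySem.Set Int) (scc post : List Int),
      (pvGdfs g f s (vis, scc, post)).1 = (pvTDfsA g f s (vis, scc)).1 ∧
      (pvGdfs g f s (vis, scc, post)).2.1 = (pvTDfsA g f s (vis, scc)).2 := by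
  intro f
  induction f with
  | zero => intro s vis scc post; simp [pvGdfs, pvTDfsA]
  | succ f ih =>
    intro s vis scc post
    have hrel := pvFoldlRel
      (fun (x : PySem.Set Int × List Int × List Int) (y : PySem.Set Int × List Int) =>
        x.1 = y.1 ∧ x.2.1 = y.2)
      (fun acc nei => if nei ∈ acc.1 then acc else pvGdfs g f nei acc)
      (fun acc nei => if nei ∈ acc.1 then acc else pvTDfsA g f nei acc)
      (g.getD s []) (PySem.Set.add vis s, scc ++ [s], post)
      (PySem.Set.add vis s, scc ++ [s])
      ⟨rfl, rfl⟩
      (by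
        rintro ⟨b1, b2, b3⟩ ⟨c1, c2⟩ a ha ⟨h1, h2⟩
        simp only at h1 h2
        subst h1 h2
        by_cases hm : a ∈ b1
        · simp [hm]
        · simp only [hm, if_neg, not_false_iff]
          exact ih a b1 b2 b3)
    obtain ⟨h1, h2⟩ := hrel
    simp only [pvGdfs, pvTDfsA]
    exact ⟨by simpa using h1, by simpa using h2⟩

-- shape: visited-list and preorder advance in lockstep; postorder is a permutation
theorem pvGdfs_shape (g : PySem.Dict Int (List Int)) :
    ∀ (f : Nat) (s : Int) (st : PySem.Set Int × List Int × List Int), s ∉ st.1 →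
      ∃ d q : List Int,
        pvGdfs g f s st = (st.1 ++ d, st.2.1 ++ d, st.2.2 ++ q) ∧
        q.Perm d ∧
        (∀ x ∈ d, x = s ∨ ∃ u, x ∈ g.getD u []) ∧
        (0 < f → s ∈ d) := by
  intro f
  induction f with
  | zero =>
    intro s st _
    exact ⟨[], [], by simp [pvGdfs], List.Perm.nil, by simp, by omega⟩
  | succ f ih =>
    rintro s ⟨st1, st2, st3⟩ hs
    simp only at hs
    have hstart : PySem.Set.add st1 s = st1 ++ [s] := PySem.Set.add_of_not_mem hs
    have hinv := pvFoldlInv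
      (fun (acc : PySem.Set Int × List Int × List Int) =>
        ∃ e r : List Int, acc = (st1 ++ s :: e, st2 ++ s :: e, st3 ++ r) ∧
          r.Perm e ∧ ∀ x ∈ e, ∃ u, x ∈ g.getD u [])
      (fun acc nei => if nei ∈ acc.1 then acc else pvGdfs g f nei acc)
      (g.getD s []) (PySem.Set.add st1 s, st2 ++ [s], st3)
      ⟨[], [], by simp [hstart], List.Perm.nil, by simp⟩
      (by
        rintro b a ha ⟨e, r, hb, hperm, hcl⟩
        subst hb
        by_cases hm : a ∈ st1 ++ s :: e
        · exact ⟨e, r, by simp [hm], hperm, hcl⟩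
        · simp only [hm, if_neg, not_false_iff]
          obtain ⟨d', q', heq, hp', hcl', _⟩ := ih a (st1 ++ s :: e, st2 ++ s :: e, st3 ++ r) hm
          refine ⟨e ++ d', r ++ q', ?_, hperm.append hp', ?_⟩
          · rw [heq]; simp
          · intro x hx
            rcases List.mem_append.1 hx with hx | hx
            · exact hcl x hx
            · rcases hcl' x hx with rfl | h
              · exact ⟨s, ha⟩
              · exact h)
    obtain ⟨e, r, hfold, hperm, hcl⟩ := hinv
    refine ⟨s :: e, r ++ [s], ?_, ?_, ?_, fun _ => by simp⟩
    · simp only [pvGdfs]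
      rw [hfold]
      simp
    · exact (List.perm_append_singleton s r).trans (hperm.cons s)
    · intro x hx
      rcases List.mem_cons.1 hx with rfl | hx
      · exact Or.inl rfl
      · exact Or.inr (hcl x hx)

theorem pvGdfs_nodup (g : PySem.Dict Int (List Int)) :
    ∀ (f : Nat) (s : Int) (st : PySem.Set Int × List Int × List Int),
      st.1.Nodup → ((pvGdfs g f s st).1).Nodup := by
  intro f
  induction f with
  | zero => intro s st h; simpa [pvGdfs] using h
  | succ f ih =>
    intro s st h
    have hinv := pvFoldlInv
      (fun (acc : PySem.Set Int × List Int × List Int) => acc.1.Nodup)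
      (fun acc nei => if nei ∈ acc.1 then acc else pvGdfs g f nei acc)
      (g.getD s []) (PySem.Set.add st.1 s, st.2.1 ++ [s], st.2.2)
      (by simpa using PySem.Set.nodup_add st.1 s h)
      (by
        intro b a _ hb
        by_cases hm : a ∈ b.1
        · simpa [hm] using hb
        · simp only [hm, if_neg, not_false_iff]
          exact ih a b hb)
    simpa only [pvGdfs] using hinv

-- fuel stability: any fuel beyond the number of unvisited nodes gives the same result
theorem pvGdfs_fuel (n : Int) (g : PySem.Dict Int (List Int)) (hC : pvClosed n g) :
    ∀ (m : Nat) (vis : PySem.Set Int) (pre post : List Int) (s : Int) (f f' : Nat),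
      pvUnv n vis ≤ m → s ∉ vis → 0 ≤ s → s < n →
      pvUnv n vis < f → pvUnv n vis < f' →
      pvGdfs g f s (vis, pre, post) = pvGdfs g f' s (vis, pre, post) := by
  intro m
  induction m with
  | zero =>
    intro vis pre post s f f' hm hs h0 h1 _ _
    exact absurd (pvUnv_pos n vis s h0 h1 hs) (by omega)
  | succ m ih =>
    intro vis pre post s f f' hm hs h0 h1 hf hf'
    have hpos : 0 < pvUnv n vis := pvUnv_pos n vis s h0 h1 hs
    obtain ⟨f1, rfl⟩ : ∃ f1, f = f1 + 1 := ⟨f - 1, by omega⟩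
    obtain ⟨f2, rfl⟩ : ∃ f2, f' = f2 + 1 := ⟨f' - 1, by omega⟩
    have hadd : ∀ t, t ∈ PySem.Set.add vis s → t ∈ PySem.Set.add vis s := fun _ h => h
    have hrel := pvFoldlRel
      (fun (x y : PySem.Set Int × List Int × List Int) =>
        x = y ∧ ∀ t, t ∈ PySem.Set.add vis s → t ∈ x.1)
      (fun acc nei => if nei ∈ acc.1 then acc else pvGdfs g f1 nei acc)
      (fun acc nei => if nei ∈ acc.1 then acc else pvGdfs g f2 nei acc)
      (g.getD s []) (PySem.Set.add vis s, pre ++ [s], post)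
      (PySem.Set.add vis s, pre ++ [s], post)
      ⟨rfl, hadd⟩
      (by
        rintro ⟨b1, b2, b3⟩ c a ha ⟨rfl, hsup⟩
        dsimp only
        by_cases hm2 : a ∈ b1
        · simp only [if_pos hm2]
          exact ⟨by trivial, hsup⟩
        · simp only [if_neg hm2]
          have ha' := hC s a ha
          have h1sub : pvUnv n b1 ≤ pvUnv n (PySem.Set.add vis s) := pvUnv_anti n hsup
          have h2lt : pvUnv n (PySem.Set.add vis s) < pvUnv n vis :=
            pvUnv_add_lt n vis s h0 h1 hs
          have heq : pvGdfs g f1 a (b1, b2, b3) = pvGdfs g f2 a (b1, b2, b3) :=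
            ih b1 b2 b3 a f1 f2 (by omega) hm2 ha'.1 ha'.2 (by omega) (by omega)
          refine ⟨heq, ?_⟩
          obtain ⟨d, q, hshape, -, -, -⟩ :=
            pvGdfs_shape g f1 a (b1, b2, b3) hm2
          intro t ht
          rw [hshape]
          exact List.mem_append.2 (Or.inl (hsup t ht)))
    simp only [pvGdfs]
    rw [hrel.1]

theorem pvGstep_super (g : PySem.Dict Int (List Int)) (k : Nat) :
    ∀ (rest : List Int) (st : PySem.Set Int × List Int × List Int) (t : Int),
      t ∈ st.1 → t ∈ (rest.foldl (pvGstep g k) st).1 := by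
  intro rest
  induction rest with
  | nil => intro st t ht; exact ht
  | cons a rest ih =>
    intro st t ht
    rw [List.foldl_cons]
    refine ih _ t ?_
    unfold pvGstep
    by_cases hm : a ∈ st.1
    · simpa [hm] using ht
    · simp only [hm, if_neg, not_false_iff]
      obtain ⟨d, q, hshape, -, -, -⟩ := pvGdfs_shape g k a st hm
      rw [hshape]
      exact List.mem_append.2 (Or.inl ht)

theorem pvFoldStab (n : Int) (g : PySem.Dict Int (List Int)) (hC : pvClosed n g) :
    ∀ (rest : List Int) (st : PySem.Set Int × List Int × List Int) (k k' : Nat),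
      (∀ v ∈ rest, 0 ≤ v ∧ v < n) →
      pvUnv n st.1 < k → pvUnv n st.1 < k' →
      rest.foldl (pvGstep g k) st = rest.foldl (pvGstep g k') st := by
  intro rest
  induction rest with
  | nil => intro st k k' _ _ _; rfl
  | cons a rest ih =>
    intro st k k' hr hk hk'
    have ha := hr a (by simp)
    rw [List.foldl_cons, List.foldl_cons]
    by_cases hm : a ∈ st.1
    · have : pvGstep g k st a = st := by simp [pvGstep, hm]
      have h2 : pvGstep g k' st a = st := by simp [pvGstep, hm]
      rw [this, h2]
      exact ih st k k' (fun v hv => hr v (by simp [hv])) hk hk'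
    · have heq : pvGstep g k st a = pvGstep g k' st a := by
        unfold pvGstep
        simp only [hm, if_neg, not_false_iff]
        obtain ⟨s1, s2, s3⟩ := st
        exact pvGdfs_fuel n g hC (pvUnv n s1) s1 s2 s3 a k k' le_rfl hm ha.1 ha.2 hk hk'
      rw [heq]
      have hsup : ∀ t, t ∈ st.1 → t ∈ (pvGstep g k' st a).1 := by
        intro t ht
        unfold pvGstep
        simp only [hm, if_neg, not_false_iff]
        obtain ⟨d, q, hshape, -, -, -⟩ := pvGdfs_shape g k' a st hm
        rw [hshape]
        exact List.mem_append.2 (Or.inl ht)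
      have hle : pvUnv n (pvGstep g k' st a).1 ≤ pvUnv n st.1 := pvUnv_anti n hsup
      exact ih _ k k' (fun v hv => hr v (by simp [hv])) (by omega) (by omega)

-- the master simulation lemma: one frame of B's loop behaves like processing its
-- remaining neighbours with pvGdfs and then emitting u to the postorder
theorem pvSim (n : Int) (g : PySem.Dict Int (List Int)) (D : Nat)
    (hC : pvClosed n g) (hD : pvDegLe g D) :
    ∀ (m : Nat) (rest : List Int) (u : Int) (fs : List (Int × List Int))
      (vis : PySem.Set Int) (pre post : List Int),
      pvUnv n vis ≤ m → (∀ v ∈ rest, 0 ≤ v ∧ v < n) →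
      ∃ c : Nat,
        c + pvUnv n (rest.foldl (pvGstep g (pvK n)) (vis, pre, post)).1 * (D + 1)
          ≤ 1 + rest.length + pvUnv n vis * (D + 1) ∧
        ∀ f : Nat, pvIterLoop g (f + c) ((u, rest) :: fs) vis pre post =
          pvIterLoop g f fs (rest.foldl (pvGstep g (pvK n)) (vis, pre, post)).1
            (rest.foldl (pvGstep g (pvK n)) (vis, pre, post)).2.1
            ((rest.foldl (pvGstep g (pvK n)) (vis, pre, post)).2.2 ++ [u]) := by
  intro m
  induction m using Nat.strong_induction_on with
  | _ m ihm =>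
    intro rest
    induction rest with
    | nil =>
      intro u fs vis pre post hm hr
      refine ⟨1, by simp, ?_⟩
      intro f
      simp [pvIterLoop]
    | cons v rest' ih2 =>
      intro u fs vis pre post hm hr
      have hv' := hr v (by simp)
      by_cases hv : v ∈ vis
      · -- v already seen: the loop just discards it
        obtain ⟨c', hb', hrun'⟩ := ih2 u fs vis pre post hm (fun w hw => hr w (by simp [hw]))
        have hfold : (v :: rest').foldl (pvGstep g (pvK n)) (vis, pre, post)
            = rest'.foldl (pvGstep g (pvK n)) (vis, pre, post) := by
          rw [List.foldl_cons]
          congr 1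
          simp [pvGstep, hv]
        refine ⟨c' + 1, ?_, ?_⟩
        · rw [hfold]
          generalize pvUnv n (rest'.foldl (pvGstep g (pvK n)) (vis, pre, post)).1 * (D + 1) = A at hb' ⊢
          generalize pvUnv n vis * (D + 1) = B at hb' ⊢
          simp only [List.length_cons]
          omega
        · intro f
          have e1 : f + (c' + 1) = (f + c') + 1 := by omega
          rw [e1, hfold]
          have hstep : pvIterLoop g ((f + c') + 1) ((u, v :: rest') :: fs) vis pre post
              = pvIterLoop g (f + c') ((u, rest') :: fs) vis pre post := by
            simp [pvIterLoop, hv]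
          rw [hstep]
          exact hrun' f
      · -- v fresh: push it and recurse
        have hpos : 0 < pvUnv n vis := pvUnv_pos n vis v hv'.1 hv'.2 hv
        have hlt : pvUnv n (PySem.Set.add vis v) < pvUnv n vis :=
          pvUnv_add_lt n vis v hv'.1 hv'.2 hv
        have hnle := pvUnv_le n vis
        have hntpos : 1 ≤ n.toNat := by omega
        obtain ⟨c₁, hb₁, hrun₁⟩ := ihm (m - 1) (by omega) (g.getD v []) v
          ((u, rest') :: fs) (PySem.Set.add vis v) (pre ++ [v]) post
          (by omega) (fun w hw => hC v w hw)
        -- the folded inner state is exactly pvGdfs (pvK n) v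
        have hstab := pvFoldStab n g hC (g.getD v [])
          (PySem.Set.add vis v, pre ++ [v], post) n.toNat (pvK n)
          (fun w hw => hC v w hw)
          (by show pvUnv n (PySem.Set.add vis v) < n.toNat; omega)
          (by show pvUnv n (PySem.Set.add vis v) < pvK n; unfold pvK; omega)
        have hst2 : pvGdfs g (pvK n) v (vis, pre, post) =
            (((g.getD v []).foldl (pvGstep g (pvK n)) (PySem.Set.add vis v, pre ++ [v], post)).1,
             ((g.getD v []).foldl (pvGstep g (pvK n)) (PySem.Set.add vis v, pre ++ [v], post)).2.1,
             ((g.getD v []).foldl (pvGstep g (pvK n)) (PySem.Set.add vis v, pre ++ [v], post)).2.2 ++ [v]) := by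
          show pvGdfs g (n.toNat + 1) v (vis, pre, post) = _
          simp only [pvGdfs]
          rw [show (fun (acc : PySem.Set Int × List Int × List Int) nei =>
              if nei ∈ acc.1 then acc else pvGdfs g n.toNat nei acc) = pvGstep g n.toNat from rfl]
          rw [hstab]
        set F₁ := (g.getD v []).foldl (pvGstep g (pvK n)) (PySem.Set.add vis v, pre ++ [v], post) with hF₁
        have hsupF₁ : ∀ t, t ∈ PySem.Set.add vis v → t ∈ F₁.1 :=
          fun t ht => pvGstep_super g (pvK n) (g.getD v []) _ t ht
        have hunvF₁ : pvUnv n F₁.1 ≤ pvUnv n (PySem.Set.add vis v) := pvUnv_anti n hsupF₁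
        obtain ⟨c₂, hb₂, hrun₂⟩ := ih2 u fs F₁.1 F₁.2.1 (F₁.2.2 ++ [v])
          (by omega) (fun w hw => hr w (by simp [hw]))
        have hfold : (v :: rest').foldl (pvGstep g (pvK n)) (vis, pre, post)
            = rest'.foldl (pvGstep g (pvK n)) (F₁.1, F₁.2.1, F₁.2.2 ++ [v]) := by
          rw [List.foldl_cons]
          congr 1
          show pvGstep g (pvK n) (vis, pre, post) v = _
          unfold pvGstep
          simp only [if_neg hv]
          exact hst2
        refine ⟨1 + c₁ + c₂, ?_, ?_⟩
        · rw [hfold]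
          have hdeg : (g.getD v []).length ≤ D := hD v
          have hmul : (pvUnv n (PySem.Set.add vis v) + 1) * (D + 1)
              ≤ pvUnv n vis * (D + 1) := Nat.mul_le_mul_right _ (by omega)
          rw [Nat.add_mul] at hmul
          generalize pvUnv n (rest'.foldl (pvGstep g (pvK n)) (F₁.1, F₁.2.1, F₁.2.2 ++ [v])).1 * (D + 1) = A2 at hb₂ ⊢
          generalize pvUnv n F₁.1 * (D + 1) = A1 at hb₁ hb₂ ⊢
          generalize pvUnv n (PySem.Set.add vis v) * (D + 1) = A0 at hb₁ hmul ⊢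
          generalize pvUnv n vis * (D + 1) = B at hmul ⊢
          simp only [List.length_cons]
          omega
        · intro f
          have e1 : f + (1 + c₁ + c₂) = (((f + c₂) + c₁)) + 1 := by omega
          rw [e1, hfold]
          have hstep : pvIterLoop g (((f + c₂) + c₁) + 1) ((u, v :: rest') :: fs) vis pre post
              = pvIterLoop g ((f + c₂) + c₁) ((v, g.getD v []) :: (u, rest') :: fs)
                  (PySem.Set.add vis v) (pre ++ [v]) post := by
            simp [pvIterLoop, hv]
          rw [hstep, hrun₁ (f + c₂), hrun₂ f]

-- B's whole per-start iterative DFS equals the generic recursive DFS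
theorem pvIterDfs_eq (n : Int) (g : PySem.Dict Int (List Int)) (D : Nat)
    (hC : pvClosed n g) (hD : pvDegLe g D) (s : Int) (vis : PySem.Set Int)
    (h0 : 0 ≤ s) (h1 : s < n) (hv : s ∉ vis) :
    pvIterDfs g s vis ((n.toNat + 1) * (D + 2)) = pvGdfs g (pvK n) s (vis, [], []) := by
  have hlt := pvUnv_add_lt n vis s h0 h1 hv
  have hvle := pvUnv_le n vis
  have hnt : 1 ≤ n.toNat := by omega
  obtain ⟨c, hb, hrun⟩ := pvSim n g D hC hD (pvUnv n (PySem.Set.add vis s)) (g.getD s [])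
    s [] (PySem.Set.add vis s) [s] [] le_rfl (fun w hw => hC s w hw)
  have hdeg := hD s
  have hcle : c ≤ (n.toNat + 1) * (D + 2) := by
    have h2' : pvUnv n (PySem.Set.add vis s) * (D + 1) ≤ n.toNat * (D + 1) :=
      Nat.mul_le_mul_right _ (by omega)
    have e1 : (n.toNat + 1) * (D + 2) = n.toNat * (D + 1) + n.toNat + D + 2 := by ring
    generalize pvUnv n ((g.getD s []).foldl (pvGstep g (pvK n)) (PySem.Set.add vis s, [s], [])).1 * (D + 1) = A at hb
    generalize pvUnv n (PySem.Set.add vis s) * (D + 1) = A0 at hb h2'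
    generalize n.toNat * (D + 1) = B at h2' e1
    omega
  have hfuel : (n.toNat + 1) * (D + 2) = ((n.toNat + 1) * (D + 2) - c) + c := by omega
  have hL : ∀ (f : Nat) (seen : PySem.Set Int) (pre post : List Int),
      pvIterLoop g f [] seen pre post = (seen, pre, post) := by
    intro f seen pre post; cases f <;> simp [pvIterLoop]
  unfold pvIterDfs
  rw [hfuel, hrun ((n.toNat + 1) * (D + 2) - c), hL]
  have hstab := pvFoldStab n g hC (g.getD s [])
    (PySem.Set.add vis s, [s], []) n.toNat (pvK n)
    (fun w hw => hC s w hw)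
    (by show pvUnv n (PySem.Set.add vis s) < n.toNat; omega)
    (by show pvUnv n (PySem.Set.add vis s) < pvK n; unfold pvK; omega)
  show _ = pvGdfs g (n.toNat + 1) s (vis, [], [])
  simp only [pvGdfs]
  rw [show (fun (acc : PySem.Set Int × List Int × List Int) nei =>
      if nei ∈ acc.1 then acc else pvGdfs g n.toNat nei acc) = pvGstep g n.toNat from rfl]
  rw [show ((PySem.Set.add vis s, ([] : List Int) ++ [s], ([] : List Int)) :
      PySem.Set Int × List Int × List Int) = (PySem.Set.add vis s, [s], []) by simp]
  rw [hstab]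

-- ---- graph construction characterizations ----
theorem pvSeed_getD (m x : Int) : (pvSeedDict m).getD x ([] : List Int) = [] := by
  unfold pvSeedDict
  refine pvFoldlInv (fun d => d.getD x ([] : List Int) = [])
    (fun d i => d.insert i ([] : List Int)) (PySem.List.pyRange 0 m 1) PySem.Dict.empty
    (by simp [PySem.Dict.getD_empty]) ?_
  intro d i _ h
  rw [PySem.Dict.getD_insert]
  split
  · rfl
  · exact h

theorem pvSeed_keys (m : Int) : (pvSeedDict m).keys = PySem.List.pyRange 0 m 1 := by
  unfold pvSeedDict
  rw [PySem.Dict.keys_foldl_insert (f := fun _ _ => ([] : List Int))]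
  rw [PySem.Dict.keys_empty, PySem.Set.update_nil_left]
  exact PySem.Set.ofList_eq_self_of_nodup _ (PySem.List.nodup_pyRange_one 0 m)

theorem pvBuild_split (n : Int) (ff ft : List Int) :
    pvBuildMaps n ff ft =
      ((ff.zip ft).foldl
        (fun (d : PySem.Dict Int (List Int)) (e : Int × Int) => d.modify e.1 [] (· ++ [e.2]))
        (pvSeedDict n),
       (ff.zip ft).foldl
        (fun (d : PySem.Dict Int (List Int)) (e : Int × Int) => d.modify e.2 [] (· ++ [e.1]))
        (pvSeedDict n)) := by
  unfold pvBuildMaps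
  exact PySem.List.foldl_prod_mk
    (fun (d : PySem.Dict Int (List Int)) (e : Int × Int) => d.modify e.1 [] (· ++ [e.2]))
    (fun (d : PySem.Dict Int (List Int)) (e : Int × Int) => d.modify e.2 [] (· ++ [e.1]))
    (ff.zip ft) (pvSeedDict n) (pvSeedDict n)

theorem pvAdj_getD (n : Int) (ff ft : List Int) (u : Int) :
    (pvBuildMaps n ff ft).1.getD u [] =
      ((ff.zip ft).filter (fun e => e.1 == u)).map (fun e => e.2) := by
  rw [pvBuild_split]
  dsimp only
  rw [PySem.Dict.getD_foldl_modify_append, pvSeed_getD]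
  simp

theorem pvRadj_getD (n : Int) (ff ft : List Int) (u : Int) :
    (pvBuildMaps n ff ft).2.getD u [] =
      ((ff.zip ft).filter (fun e => e.2 == u)).map (fun e => e.1) := by
  rw [pvBuild_split]
  dsimp only
  have hswap : (ff.zip ft).foldl
      (fun (d : PySem.Dict Int (List Int)) (e : Int × Int) => d.modify e.2 [] (· ++ [e.1]))
      (pvSeedDict n)
      = ((ff.zip ft).map Prod.swap).foldl
        (fun (d : PySem.Dict Int (List Int)) (p : Int × Int) => d.modify p.1 [] (· ++ [p.2]))
        (pvSeedDict n) := by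
    rw [List.foldl_map]
    exact PySem.List.foldl_congr_mem _ _ _ _ (fun acc x _ => by simp)
  rw [hswap, PySem.Dict.getD_foldl_modify_append, pvSeed_getD]
  rw [List.filter_map, List.map_map]
  simp [Function.comp_def]

theorem pvAdj_keys (n : Int) (ff ft : List Int)
    (h : ∀ e ∈ ff.zip ft, 0 ≤ e.1 ∧ e.1 < n) :
    (pvBuildMaps n ff ft).1.keys = PySem.List.pyRange 0 n 1 := by
  rw [pvBuild_split]
  dsimp only
  rw [PySem.Dict.keys_foldl_modify_key (key := fun (e : Int × Int) => e.1)
    (f := fun _ (e : Int × Int) => (· ++ [e.2]))]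
  rw [pvSeed_keys, PySem.Set.update_eq_append_filter]
  have hnil : (List.filter (fun y => !PySem.Set.contains (PySem.List.pyRange 0 n 1) y)
      (PySem.Set.ofList ((ff.zip ft).map (fun e => e.1)))) = [] := by
    rw [List.filter_eq_nil_iff]
    intro y hy
    rw [PySem.Set.mem_ofList] at hy
    obtain ⟨e, he, rfl⟩ := List.mem_map.1 hy
    have hb := h e he
    simpa using hb
  rw [hnil, List.append_nil]

-- ---- scc_map and counting ----
theorem pvGetD_foldl_insert_not_mem (L : List Int) (c : Int) (d : PySem.Dict Int Int)
    (v : Int) (hv : v ∉ L) :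
    (L.foldl (fun d x => d.insert x c) d).getD v 0 = d.getD v 0 := by
  induction L generalizing d with
  | nil => rfl
  | cons x L ih =>
    rw [List.foldl_cons, ih _ (fun h => hv (by simp [h])), PySem.Dict.getD_insert]
    rw [if_neg (fun h => hv (by simp [h]))]

theorem pvGetD_foldl_insert_mem (L : List Int) (c : Int) (d : PySem.Dict Int Int)
    (v : Int) (hv : v ∈ L) :
    (L.foldl (fun d x => d.insert x c) d).getD v 0 = c := by
  induction L generalizing d with
  | nil => cases hv
  | cons x L ih =>
    rw [List.foldl_cons]
    by_cases hvL : v ∈ L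
    · exact ih _ hvL
    · have hvx : v = x := by rcases List.mem_cons.1 hv with h | h; exact h; exact absurd h hvL
      subst hvx
      rw [pvGetD_foldl_insert_not_mem L c _ v hvL, PySem.Dict.getD_insert, if_pos rfl]

theorem pvSccMapOf_snoc (sccs : List (List Int)) (L : List Int) :
    pvSccMapOf (sccs ++ [L]) =
      L.foldl (fun d x => d.insert x ((sccs.length : Int))) (pvSccMapOf sccs) := by
  unfold pvSccMapOf
  rw [PySem.List.enumerate_append, List.foldl_append]
  rw [PySem.List.enumerate_cons, PySem.List.enumerate_nil]
  simp

theorem pvSccMap_getD (sccs : List (List Int)) (hnd : sccs.flatten.Nodup)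
    (i : Nat) (hi : i < sccs.length) (v : Int) (hv : v ∈ sccs[i]) :
    (pvSccMapOf sccs).getD v 0 = (i : Int) := by
  induction sccs using List.reverseRecOn generalizing i with
  | nil => simp at hi
  | append_singleton sccs L ih =>
    rw [List.flatten_append] at hnd
    simp only [List.flatten_cons, List.flatten_nil, List.append_nil] at hnd
    have hnd1 : sccs.flatten.Nodup := (List.nodup_append.1 hnd).1
    have hdisj : ∀ x ∈ sccs.flatten, x ∉ L := by
      have hd := (List.nodup_append.1 hnd).2.2
      intro x hx hxL
      exact hd x hx x hxL rfl
    rw [pvSccMapOf_snoc]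
    rcases Nat.lt_or_ge i sccs.length with hlt | hge
    · have hv' : v ∈ sccs[i] := by
        rw [List.getElem_append_left hlt] at hv; exact hv
      have hvfl : v ∈ sccs.flatten :=
        List.mem_flatten.2 ⟨sccs[i], List.getElem_mem hlt, hv'⟩
      rw [pvGetD_foldl_insert_not_mem _ _ _ _ (hdisj v hvfl)]
      exact ih hnd1 i hlt hv'
    · have hieq : i = sccs.length := by
        have := hi; simp only [List.length_append, List.length_cons,
          List.length_nil] at this; omega
      have hvL : v ∈ L := by
        have hgl : (sccs ++ [L])[i] = L := by
          rw [List.getElem_append_right hge]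
          simp [hieq]
        rwa [hgl] at hv
      rw [pvGetD_foldl_insert_mem _ _ _ _ hvL, hieq]

theorem pvSccMap_range (sccs : List (List Int)) (hnd : sccs.flatten.Nodup)
    (v : Int) (hv : v ∈ sccs.flatten) :
    0 ≤ (pvSccMapOf sccs).getD v 0 ∧ (pvSccMapOf sccs).getD v 0 < (sccs.length : Int) := by
  rw [List.mem_flatten] at hv
  obtain ⟨l, hl, hvl⟩ := hv
  obtain ⟨i, hi, rfl⟩ := List.getElem_of_mem hl
  rw [pvSccMap_getD sccs hnd i hi v hvl]
  constructor
  · exact_mod_cast Nat.zero_le i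
  · exact_mod_cast hi

theorem pvLen_le_flatten (ls : List (List Int)) (h : ∀ L ∈ ls, L ≠ []) :
    ls.length ≤ ls.flatten.length := by
  induction ls with
  | nil => simp
  | cons L ls ih =>
    simp only [List.length_cons, List.flatten_cons, List.length_append]
    have h1 : 0 < L.length := List.length_pos_iff.2 (h L (by simp))
    have h2 := ih (fun M hM => h M (by simp [hM]))
    omega

theorem pvIndegCount :
    ∀ (M : List Int) (ind : List Int) (i : Int),
      (∀ t ∈ M, 0 ≤ t ∧ t < (ind.length : Int)) → 0 ≤ i → i < (ind.length : Int) →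
      PySem.List.pyGetD
        (M.foldl (fun ind t => PySem.List.pySetD ind t (PySem.List.pyGetD ind t 0 + 1)) ind)
        i 0 = PySem.List.pyGetD ind i 0 + (M.count i : Int) := by
  intro M
  induction M with
  | nil => intro ind i _ _ _; simp
  | cons t M ih =>
    intro ind i hM h0 h1
    have htb := hM t (by simp)
    rw [List.foldl_cons]
    have hlen : (PySem.List.pySetD ind t (PySem.List.pyGetD ind t 0 + 1)).length
        = ind.length := by
      rw [PySem.List.pySetD_of_nonneg _ _ htb.1, List.length_set]
    have hrec := ih (PySem.List.pySetD ind t (PySem.List.pyGetD ind t 0 + 1)) i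
      (by rw [hlen]; exact fun w hw => hM w (by simp [hw])) h0 (by rw [hlen]; exact h1)
    rw [hrec]
    have htlt : t.toNat < ind.length := by omega
    have hset : PySem.List.pyGetD (PySem.List.pySetD ind t (PySem.List.pyGetD ind t 0 + 1)) i 0
        = if i.toNat = t.toNat then PySem.List.pyGetD ind t 0 + 1
          else PySem.List.pyGetD ind i 0 := by
      have e1 : t = ((t.toNat : Nat) : Int) := by omega
      have e2 : i = ((i.toNat : Nat) : Int) := by omega
      rw [e1, e2, PySem.List.pyGetD_pySetD_natCast ind _ _ _ _ htlt, ← e1, ← e2]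
    rw [hset, List.count_cons]
    by_cases hit : i = t
    · subst hit
      rw [if_pos rfl, if_pos (by simp)]
      push_cast
      ring
    · rw [if_neg (by omega), if_neg (by simp [Ne.symm hit])]
      simp

-- ---- pass-level assembly ----
def pvP1 (n : Int) (g : PySem.Dict Int (List Int)) : PySem.Set Int × List Int :=
  (PySem.List.pyRange 0 n 1).foldl (pvStep1 g (pvK n)) (PySem.Set.empty, [])

def pvP2 (n : Int) (g : PySem.Dict Int (List Int)) (order : List Int) :
    PySem.Set Int × List (List Int) :=
  order.reverse.foldl (pvStep2 g (pvK n)) (PySem.Set.empty, [])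

theorem pvPass1A (n : Int) (g : PySem.Dict Int (List Int)) :
    ∀ (st : PySem.Set Int × List Int) (s : Int),
      (if s ∈ st.1 then st else pvDfsA g (pvK n) s st) = pvStep1 g (pvK n) st s := by
  rintro ⟨v, stk⟩ s
  by_cases hm : s ∈ v
  · simp [pvStep1, hm]
  · simp only [pvStep1, if_neg hm]
    obtain ⟨e1, e2⟩ := pvGdfs_projA g (pvK n) s v [] stk
    have happ := pvGdfs_appInv g (pvK n) s v [] stk
    refine Prod.ext ?_ ?_
    · rw [← e1, happ]
    · rw [← e2, happ]

theorem pvPass1B (n : Int) (g : PySem.Dict Int (List Int)) (D : Nat)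
    (hC : pvClosed n g) (hD : pvDegLe g D) :
    ∀ (st : PySem.Set Int × List Int) (s : Int), 0 ≤ s → s < n →
      (if s ∈ st.1 then st
       else ((pvIterDfs g s st.1 ((n.toNat + 1) * (D + 2))).1,
             st.2 ++ (pvIterDfs g s st.1 ((n.toNat + 1) * (D + 2))).2.2))
      = pvStep1 g (pvK n) st s := by
  rintro ⟨v, stk⟩ s h0 h1
  by_cases hm : s ∈ v
  · simp [pvStep1, hm]
  · simp only [pvStep1, if_neg hm]
    rw [pvIterDfs_eq n g D hC hD s v h0 h1 hm]

theorem pvPass2A (n : Int) (g : PySem.Dict Int (List Int)) :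
    ∀ (st : PySem.Set Int × List (List Int)) (r : Int),
      (if r ∈ st.1 then st
       else ((pvTDfsA g (pvK n) r (st.1, [])).1, st.2 ++ [(pvTDfsA g (pvK n) r (st.1, [])).2]))
      = pvStep2 g (pvK n) st r := by
  rintro ⟨v, sccs⟩ r
  by_cases hm : r ∈ v
  · simp [pvStep2, hm]
  · simp only [pvStep2, if_neg hm]
    obtain ⟨e1, e2⟩ := pvGdfs_projT g (pvK n) r v [] []
    rw [← e1, ← e2]

theorem pvStep1_super (n : Int) (g : PySem.Dict Int (List Int)) :
    ∀ (l : List Int) (st : PySem.Set Int × List Int) (t : Int),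
      t ∈ st.1 → t ∈ (l.foldl (pvStep1 g (pvK n)) st).1 := by
  intro l
  induction l with
  | nil => intro st t ht; exact ht
  | cons a l ih =>
    intro st t ht
    rw [List.foldl_cons]
    refine ih _ t ?_
    unfold pvStep1
    by_cases hm : a ∈ st.1
    · simpa [hm] using ht
    · simp only [if_neg hm]
      obtain ⟨d, q, hshape, -, -, -⟩ := pvGdfs_shape g (pvK n) a (st.1, [], []) hm
      rw [hshape]
      exact List.mem_append.2 (Or.inl ht)

theorem pvStep2_super (n : Int) (g : PySem.Dict Int (List Int)) :
    ∀ (l : List Int) (st : PySem.Set Int × List (List Int)) (t : Int),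
      t ∈ st.1 → t ∈ (l.foldl (pvStep2 g (pvK n)) st).1 := by
  intro l
  induction l with
  | nil => intro st t ht; exact ht
  | cons a l ih =>
    intro st t ht
    rw [List.foldl_cons]
    refine ih _ t ?_
    unfold pvStep2
    by_cases hm : a ∈ st.1
    · simpa [hm] using ht
    · simp only [if_neg hm]
      obtain ⟨d, q, hshape, -, -, -⟩ := pvGdfs_shape g (pvK n) a (st.1, [], []) hm
      rw [hshape]
      exact List.mem_append.2 (Or.inl ht)

theorem pvP1_covers (n : Int) (g : PySem.Dict Int (List Int)) :
    ∀ (l : List Int) (st : PySem.Set Int × List Int) (s : Int), s ∈ l →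
      s ∈ (l.foldl (pvStep1 g (pvK n)) st).1 := by
  intro l
  induction l with
  | nil => intro st s hs; cases hs
  | cons a l ih =>
    intro st s hs
    rw [List.foldl_cons]
    rcases List.mem_cons.1 hs with rfl | hs
    · refine pvStep1_super n g l _ s ?_
      unfold pvStep1
      by_cases hm : s ∈ st.1
      · simp [hm]
      · simp only [if_neg hm]
        obtain ⟨d, q, hshape, -, -, hroot⟩ := pvGdfs_shape g (pvK n) s (st.1, [], []) hm
        rw [hshape]
        exact List.mem_append.2 (Or.inr (hroot (by unfold pvK; omega)))
    · exact ih _ s hs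

theorem pvP1_facts (n : Int) (g : PySem.Dict Int (List Int)) (hC : pvClosed n g) :
    (∀ x, x ∈ (pvP1 n g).2 ↔ x ∈ (pvP1 n g).1) ∧
    (∀ x ∈ (pvP1 n g).1, 0 ≤ x ∧ x < n) := by
  unfold pvP1
  refine pvFoldlInv
    (fun (st : PySem.Set Int × List Int) =>
      (∀ x, x ∈ st.2 ↔ x ∈ st.1) ∧ (∀ x ∈ st.1, 0 ≤ x ∧ x < n))
    (pvStep1 g (pvK n)) (PySem.List.pyRange 0 n 1) (PySem.Set.empty, [])
    (by constructor <;> simp [PySem.Set.empty]) ?_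
  intro st s hs ⟨hiff, hbd⟩
  have hsb : 0 ≤ s ∧ s < n := (PySem.List.mem_pyRange_one).1 hs
  unfold pvStep1
  by_cases hm : s ∈ st.1
  · simpa [hm] using ⟨hiff, hbd⟩
  · simp only [if_neg hm]
    obtain ⟨d, q, hshape, hperm, hcl, -⟩ := pvGdfs_shape g (pvK n) s (st.1, [], []) hm
    rw [hshape]
    have hdb : ∀ x ∈ d, 0 ≤ x ∧ x < n := by
      intro x hx
      rcases hcl x hx with rfl | ⟨u, hu⟩
      · exact hsb
      · exact hC u x hu
    constructor
    · intro x
      simp only [List.mem_append]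
      rw [hiff x, hperm.mem_iff]
      simp
    · intro x hx
      rcases List.mem_append.1 hx with hx | hx
      · exact hbd x hx
      · exact hdb x hx

theorem pvP2_covers (n : Int) (g : PySem.Dict Int (List Int)) :
    ∀ (l : List Int) (st : PySem.Set Int × List (List Int)) (r : Int), r ∈ l →
      r ∈ (l.foldl (pvStep2 g (pvK n)) st).1 := by
  intro l
  induction l with
  | nil => intro st r hr; cases hr
  | cons a l ih =>
    intro st r hr
    rw [List.foldl_cons]
    rcases List.mem_cons.1 hr with rfl | hr
    · refine pvStep2_super n g l _ r ?_
      unfold pvStep2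
      by_cases hm : r ∈ st.1
      · simp [hm]
      · simp only [if_neg hm]
        obtain ⟨d, q, hshape, -, -, hroot⟩ := pvGdfs_shape g (pvK n) r (st.1, [], []) hm
        rw [hshape]
        exact List.mem_append.2 (Or.inr (hroot (by unfold pvK; omega)))
    · exact ih _ r hr

theorem pvP2_facts (n : Int) (g : PySem.Dict Int (List Int)) (hC : pvClosed n g)
    (order : List Int) (hord : ∀ x ∈ order, 0 ≤ x ∧ x < n) :
    (pvP2 n g order).1 = (pvP2 n g order).2.flatten ∧
    (∀ x ∈ (pvP2 n g order).1, 0 ≤ x ∧ x < n) ∧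
    ((pvP2 n g order).1.Nodup) ∧
    (∀ L ∈ (pvP2 n g order).2, L ≠ []) := by
  unfold pvP2
  refine pvFoldlInv
    (fun (st : PySem.Set Int × List (List Int)) =>
      st.1 = st.2.flatten ∧ (∀ x ∈ st.1, 0 ≤ x ∧ x < n) ∧ st.1.Nodup ∧
      (∀ L ∈ st.2, L ≠ []))
    (pvStep2 g (pvK n)) order.reverse (PySem.Set.empty, [])
    (by refine ⟨rfl, by simp [PySem.Set.empty], by simp [PySem.Set.empty], by simp⟩) ?_
  intro st r hr ⟨hfl, hbd, hnd, hne⟩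
  have hrb : 0 ≤ r ∧ r < n := hord r (List.mem_reverse.1 hr)
  unfold pvStep2
  by_cases hm : r ∈ st.1
  · simpa [hm] using ⟨hfl, hbd, hnd, hne⟩
  · simp only [if_neg hm]
    obtain ⟨d, q, hshape, hperm, hcl, hroot⟩ := pvGdfs_shape g (pvK n) r (st.1, [], []) hm
    have hnd' := pvGdfs_nodup g (pvK n) r (st.1, [], []) hnd
    rw [hshape] at hnd' ⊢
    simp only [List.nil_append] at hshape hnd' ⊢
    refine ⟨?_, ?_, hnd', ?_⟩
    · rw [List.flatten_append, ← hfl]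
      simp
    · intro x hx
      rcases List.mem_append.1 hx with hx | hx
      · exact hbd x hx
      · rcases hcl x hx with rfl | ⟨u, hu⟩
        · exact hrb
        · exact hC u x hu
    · intro L hL
      rcases List.mem_append.1 hL with hL | hL
      · exact hne L hL
      · rw [List.mem_singleton] at hL
        subst hL
        exact List.ne_nil_of_mem (hroot (by unfold pvK; omega))

theorem pvB_p2_rel (n : Int) (g : PySem.Dict Int (List Int)) (D : Nat)
    (hC : pvClosed n g) (hD : pvDegLe g D) (order : List Int)
    (hord : ∀ x ∈ order, 0 ≤ x ∧ x < n) :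
    order.reverse.foldl
      (fun (st : PySem.Set Int × PySem.Dict Int Int × Int) r =>
        if r ∈ st.1 then st
        else ((pvIterDfs g r st.1 ((n.toNat + 1) * (D + 2))).1,
              (pvIterDfs g r st.1 ((n.toNat + 1) * (D + 2))).2.1.foldl
                (fun d v => d.insert v st.2.2) st.2.1,
              st.2.2 + 1))
      (PySem.Set.empty, PySem.Dict.empty, (0 : Int))
    = ((pvP2 n g order).1, pvSccMapOf (pvP2 n g order).2,
       ((pvP2 n g order).2.length : Int)) := by
  unfold pvP2
  have hrel := pvFoldlRel
    (fun (b : PySem.Set Int × PySem.Dict Int Int × Int)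
         (a : PySem.Set Int × List (List Int)) =>
      b.1 = a.1 ∧ b.2.1 = pvSccMapOf a.2 ∧ b.2.2 = (a.2.length : Int))
    (fun (st : PySem.Set Int × PySem.Dict Int Int × Int) r =>
        if r ∈ st.1 then st
        else ((pvIterDfs g r st.1 ((n.toNat + 1) * (D + 2))).1,
              (pvIterDfs g r st.1 ((n.toNat + 1) * (D + 2))).2.1.foldl
                (fun d v => d.insert v st.2.2) st.2.1,
              st.2.2 + 1))
    (pvStep2 g (pvK n)) order.reverse
    (PySem.Set.empty, PySem.Dict.empty, (0 : Int)) (PySem.Set.empty, [])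
    ⟨rfl, rfl, rfl⟩
    (by
      rintro ⟨b1, b2, b3⟩ ⟨a1, a2⟩ r hr ⟨h1, h2, h3⟩
      simp only at h1 h2 h3
      subst h1 h2 h3
      by_cases hm : r ∈ b1
      · simp [pvStep2, hm]
      · have hrb := hord r (List.mem_reverse.1 hr)
        have hiter := pvIterDfs_eq n g D hC hD r b1 hrb.1 hrb.2 hm
        simp only [hiter, pvStep2, if_neg hm]
        refine ⟨by trivial, ?_, by simp⟩
        rw [pvSccMapOf_snoc])
  obtain ⟨h1, h2, h3⟩ := hrel
  exact Prod.ext h1 (Prod.ext h2 h3)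

-- ---- A's condensation-DAG and indegree pipeline, characterized ----
def pvDagOf (adj : PySem.Dict Int (List Int)) (sm : PySem.Dict Int Int) (m : Int) :
    PySem.Dict Int (List Int) :=
  adj.keys.foldl
    (fun dg node => (adj.getD node []).foldl
      (fun dg nei =>
        if sm.getD node 0 ≠ sm.getD nei 0
        then dg.modify (sm.getD node 0) [] (· ++ [sm.getD nei 0])
        else dg) dg)
    (pvSeedDict m)

def pvLbig (adj : PySem.Dict Int (List Int)) (sm : PySem.Dict Int Int) : List (Int × Int) :=
  adj.keys.flatMap (fun u =>
    ((adj.getD u []).filter (fun w => decide (sm.getD u 0 ≠ sm.getD w 0))).map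
      (fun w => (sm.getD u 0, sm.getD w 0)))

theorem pvDagOf_eq (adj : PySem.Dict Int (List Int)) (sm : PySem.Dict Int Int) (m : Int) :
    pvDagOf adj sm m =
      (pvLbig adj sm).foldl (fun dg p => dg.modify p.1 [] (· ++ [p.2])) (pvSeedDict m) := by
  unfold pvDagOf pvLbig
  rw [List.foldl_flatMap]
  refine (PySem.List.foldl_congr_mem _ _ _ _ ?_).symm
  intro acc u _
  rw [List.foldl_map, ← PySem.List.foldl_ite_eq_foldl_filter
    (p := fun w => sm.getD u 0 ≠ sm.getD w 0)]

theorem pvDagOf_getD (adj : PySem.Dict Int (List Int)) (sm : PySem.Dict Int Int)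
    (m : Int) (j : Int) :
    (pvDagOf adj sm m).getD j [] =
      ((pvLbig adj sm).filter (fun p => p.1 == j)).map (fun p => p.2) := by
  rw [pvDagOf_eq, PySem.Dict.getD_foldl_modify_append, pvSeed_getD, List.nil_append]

theorem pvDagOf_keys (adj : PySem.Dict Int (List Int)) (sm : PySem.Dict Int Int) (m : Int)
    (h : ∀ p ∈ pvLbig adj sm, p.1 ∈ PySem.List.pyRange 0 m 1) :
    (pvDagOf adj sm m).keys = PySem.List.pyRange 0 m 1 := by
  rw [pvDagOf_eq, PySem.Dict.keys_foldl_modify_key (key := fun (p : Int × Int) => p.1)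
    (f := fun _ (p : Int × Int) => (· ++ [p.2])), pvSeed_keys,
    PySem.Set.update_eq_append_filter]
  have hnil : (List.filter (fun y => !PySem.Set.contains (PySem.List.pyRange 0 m 1) y)
      (PySem.Set.ofList ((pvLbig adj sm).map (fun p => p.1)))) = [] := by
    rw [List.filter_eq_nil_iff]
    intro y hy
    rw [PySem.Set.mem_ofList] at hy
    obtain ⟨p, hp, rfl⟩ := List.mem_map.1 hy
    simpa using (PySem.List.mem_pyRange_one).1 (h p hp)
  rw [hnil, List.append_nil]

theorem pvLbig_mem (adj : PySem.Dict Int (List Int)) (sm : PySem.Dict Int Int)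
    (p : Int × Int) :
    p ∈ pvLbig adj sm ↔
      ∃ u ∈ adj.keys, ∃ w ∈ adj.getD u [],
        sm.getD u 0 ≠ sm.getD w 0 ∧ p = (sm.getD u 0, sm.getD w 0) := by
  unfold pvLbig
  simp only [List.mem_flatMap, List.mem_map, List.mem_filter, decide_eq_true_eq]
  constructor
  · rintro ⟨u, hu, w, ⟨hw, hne⟩, rfl⟩
    exact ⟨u, hu, w, hw, hne, rfl⟩
  · rintro ⟨u, hu, w, hw, hne, rfl⟩
    exact ⟨u, hu, w, ⟨hw, hne⟩, rfl⟩

def pvIndegOf (dag : PySem.Dict Int (List Int)) (m : Nat) : List Int :=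
  dag.keys.foldl
    (fun ind node => (dag.getD node []).foldl
      (fun ind nei => PySem.List.pySetD ind nei (PySem.List.pyGetD ind nei 0 + 1)) ind)
    (List.replicate m 0)

theorem pvIndegOf_eq (dag : PySem.Dict Int (List Int)) (m : Nat) :
    pvIndegOf dag m =
      (dag.keys.flatMap (fun j => dag.getD j [])).foldl
        (fun ind t => PySem.List.pySetD ind t (PySem.List.pyGetD ind t 0 + 1))
        (List.replicate m 0) := by
  unfold pvIndegOf
  rw [List.foldl_flatMap]

-- ===== VERDICT (by name: the statement is the Claim_ definition above) =====
theorem minRunesToAdd_spec : Claim_equal_minRunesToAdd := by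
  unfold Claim_equal_minRunesToAdd
  intro n crystals ff ft _ hPre
  unfold Spec_minRunesToAdd
  obtain ⟨hE, hCr⟩ := hPre
  have hEfst : ∀ e ∈ ff.zip ft, 0 ≤ e.1 ∧ e.1 < n := fun e he => (hE e he).1
  have hCadj : pvClosed n (pvBuildMaps n ff ft).1 := by
    intro u v hv
    rw [pvAdj_getD] at hv
    obtain ⟨e, he, rfl⟩ := List.mem_map.1 hv
    exact (hE e (List.mem_filter.1 he).1).2
  have hCradj : pvClosed n (pvBuildMaps n ff ft).2 := by
    intro u v hv
    rw [pvRadj_getD] at hv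
    obtain ⟨e, he, rfl⟩ := List.mem_map.1 hv
    exact (hE e (List.mem_filter.1 he).1).1
  have hDadj : pvDegLe (pvBuildMaps n ff ft).1 (ff.zip ft).length := by
    intro u; rw [pvAdj_getD, List.length_map]; exact List.length_filter_le _ _
  have hDradj : pvDegLe (pvBuildMaps n ff ft).2 (ff.zip ft).length := by
    intro u; rw [pvRadj_getD, List.length_map]; exact List.length_filter_le _ _
  -- pass 1: both ports compute pvP1
  have hA1 : (PySem.List.pyRange 0 n 1).foldl
      (fun st node => if node ∈ st.1 then st
        else pvDfsA (pvBuildMaps n ff ft).1 (n.toNat + 1) node st)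
      (PySem.Set.empty, ([] : List Int)) = pvP1 n (pvBuildMaps n ff ft).1 := by
    unfold pvP1
    exact PySem.List.foldl_congr_mem _ _ _ _ (fun acc x _ => pvPass1A n _ acc x)
  have hB1 : (PySem.List.pyRange 0 n 1).foldl
      (fun (st : PySem.Set Int × List Int) s => if s ∈ st.1 then st
        else ((pvIterDfs (pvBuildMaps n ff ft).1 s st.1
                ((n.toNat + 1) * ((ff.zip ft).length + 2))).1,
              st.2 ++ (pvIterDfs (pvBuildMaps n ff ft).1 s st.1
                ((n.toNat + 1) * ((ff.zip ft).length + 2))).2.2))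
      (PySem.Set.empty, ([] : List Int)) = pvP1 n (pvBuildMaps n ff ft).1 := by
    unfold pvP1
    refine PySem.List.foldl_congr_mem _ _ _ _ (fun acc x hx => ?_)
    have hxb := (PySem.List.mem_pyRange_one).1 hx
    exact pvPass1B n _ _ hCadj hDadj acc x hxb.1 hxb.2
  obtain ⟨hOrdIff, hVisBd⟩ := pvP1_facts n (pvBuildMaps n ff ft).1 hCadj
  have hOrd : ∀ x ∈ (pvP1 n (pvBuildMaps n ff ft).1).2, 0 ≤ x ∧ x < n :=
    fun x hx => hVisBd x ((hOrdIff x).1 hx)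
  have hCov1 : ∀ s : Int, 0 ≤ s → s < n → s ∈ (pvP1 n (pvBuildMaps n ff ft).1).2 := by
    intro s h0 h1
    refine (hOrdIff s).2 ?_
    unfold pvP1
    exact pvP1_covers n _ _ _ s ((PySem.List.mem_pyRange_one).2 ⟨h0, h1⟩)
  -- pass 2
  have hA2 : (pvP1 n (pvBuildMaps n ff ft).1).2.reverse.foldl
      (fun (st : PySem.Set Int × List (List Int)) node => if node ∈ st.1 then st
        else ((pvTDfsA (pvBuildMaps n ff ft).2 (n.toNat + 1) node (st.1, [])).1,
              st.2 ++ [(pvTDfsA (pvBuildMaps n ff ft).2 (n.toNat + 1) node (st.1, [])).2]))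
      (PySem.Set.empty, ([] : List (List Int)))
      = pvP2 n (pvBuildMaps n ff ft).2 (pvP1 n (pvBuildMaps n ff ft).1).2 := by
    unfold pvP2
    exact PySem.List.foldl_congr_mem _ _ _ _ (fun acc x _ => pvPass2A n _ acc x)
  have hB2 := pvB_p2_rel n (pvBuildMaps n ff ft).2 (ff.zip ft).length hCradj hDradj
      (pvP1 n (pvBuildMaps n ff ft).1).2 hOrd
  obtain ⟨hfl, hbd2, hnd2, hne2⟩ := pvP2_facts n (pvBuildMaps n ff ft).2 hCradj
      (pvP1 n (pvBuildMaps n ff ft).1).2 hOrd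
  -- facts about the scc decomposition
  have hflnd : (pvP2 n (pvBuildMaps n ff ft).2 (pvP1 n (pvBuildMaps n ff ft).1).2).2.flatten.Nodup := by
    rw [← hfl]; exact hnd2
  have hcov2 : ∀ x : Int, 0 ≤ x → x < n →
      x ∈ (pvP2 n (pvBuildMaps n ff ft).2 (pvP1 n (pvBuildMaps n ff ft).1).2).2.flatten := by
    intro x h0 h1
    rw [← hfl]
    unfold pvP2
    refine pvP2_covers n _ _ _ x ?_
    rw [List.mem_reverse]
    exact hCov1 x h0 h1
  have hbdfl : ∀ x ∈ (pvP2 n (pvBuildMaps n ff ft).2 (pvP1 n (pvBuildMaps n ff ft).1).2).2.flatten,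
      0 ≤ x ∧ x < n := by
    intro x hx
    exact hbd2 x (by rw [hfl]; exact hx)
  have hlen2 : (pvP2 n (pvBuildMaps n ff ft).2 (pvP1 n (pvBuildMaps n ff ft).1).2).2.length ≤ n.toNat := by
    refine le_trans (pvLen_le_flatten _ hne2) ?_
    have h1 := List.toFinset_card_of_nodup hflnd
    have h2 : (pvP2 n (pvBuildMaps n ff ft).2 (pvP1 n (pvBuildMaps n ff ft).1).2).2.flatten.toFinset
        ⊆ (PySem.List.pyRange 0 n 1).toFinset := by
      intro x hx
      rw [List.mem_toFinset] at hx ⊢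
      have := hbdfl x hx
      exact (PySem.List.mem_pyRange_one).2 this
    have h3 := Finset.card_le_card h2
    have h4 := List.toFinset_card_le (PySem.List.pyRange 0 n 1)
    have h5 : (PySem.List.pyRange 0 n 1).length = n.toNat := by
      rw [PySem.List.length_pyRange_one]; simp
    omega
  have hcsr : ∀ x : Int, 0 ≤ x → x < n →
      0 ≤ (pvSccMapOf (pvP2 n (pvBuildMaps n ff ft).2 (pvP1 n (pvBuildMaps n ff ft).1).2).2).getD x 0 ∧
      (pvSccMapOf (pvP2 n (pvBuildMaps n ff ft).2 (pvP1 n (pvBuildMaps n ff ft).1).2).2).getD x 0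
        < ((pvP2 n (pvBuildMaps n ff ft).2 (pvP1 n (pvBuildMaps n ff ft).1).2).2.length : Int) :=
    fun x h0 h1 => pvSccMap_range _ hflnd x (hcov2 x h0 h1)
  -- keys of adj and of the condensation dag
  have hkeys : (pvBuildMaps n ff ft).1.keys = PySem.List.pyRange 0 n 1 := pvAdj_keys n ff ft hEfst
  have hLfst : ∀ p ∈ pvLbig (pvBuildMaps n ff ft).1 (pvSccMapOf (pvP2 n (pvBuildMaps n ff ft).2 (pvP1 n (pvBuildMaps n ff ft).1).2).2),
      p.1 ∈ PySem.List.pyRange 0 (((pvP2 n (pvBuildMaps n ff ft).2 (pvP1 n (pvBuildMaps n ff ft).1).2).2.length : Int)) 1 := by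
    intro p hp
    obtain ⟨u, hu, w, hw, hne, rfl⟩ := (pvLbig_mem _ _ p).1 hp
    rw [hkeys] at hu
    have hub := (PySem.List.mem_pyRange_one).1 hu
    exact (PySem.List.mem_pyRange_one).2 (hcsr u hub.1 hub.2)
  have hdagkeys := pvDagOf_keys (pvBuildMaps n ff ft).1 (pvSccMapOf (pvP2 n (pvBuildMaps n ff ft).2 (pvP1 n (pvBuildMaps n ff ft).1).2).2) (((pvP2 n (pvBuildMaps n ff ft).2 (pvP1 n (pvBuildMaps n ff ft).1).2).2.length : Int)) hLfst
  -- membership in the flattened indegree multiset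
  have hMmem : ∀ i : Int,
      (i ∈ (pvDagOf (pvBuildMaps n ff ft).1 (pvSccMapOf (pvP2 n (pvBuildMaps n ff ft).2 (pvP1 n (pvBuildMaps n ff ft).1).2).2) (((pvP2 n (pvBuildMaps n ff ft).2 (pvP1 n (pvBuildMaps n ff ft).1).2).2.length : Int))).keys.flatMap (fun j => (pvDagOf (pvBuildMaps n ff ft).1 (pvSccMapOf (pvP2 n (pvBuildMaps n ff ft).2 (pvP1 n (pvBuildMaps n ff ft).1).2).2) (((pvP2 n (pvBuildMaps n ff ft).2 (pvP1 n (pvBuildMaps n ff ft).1).2).2.length : Int))).getD j [])) ↔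
      ∃ e ∈ ff.zip ft, (pvSccMapOf (pvP2 n (pvBuildMaps n ff ft).2 (pvP1 n (pvBuildMaps n ff ft).1).2).2).getD e.1 0 ≠ (pvSccMapOf (pvP2 n (pvBuildMaps n ff ft).2 (pvP1 n (pvBuildMaps n ff ft).1).2).2).getD e.2 0 ∧ (pvSccMapOf (pvP2 n (pvBuildMaps n ff ft).2 (pvP1 n (pvBuildMaps n ff ft).1).2).2).getD e.2 0 = i := by
    intro i
    constructor
    · intro hM
      rw [List.mem_flatMap] at hM
      obtain ⟨j, hj, hij⟩ := hM
      rw [pvDagOf_getD] at hij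
      obtain ⟨p, hpf, rfl⟩ := List.mem_map.1 hij
      obtain ⟨hpL, -⟩ := List.mem_filter.1 hpf
      obtain ⟨u, hu, w, hw, hne, rfl⟩ := (pvLbig_mem _ _ p).1 hpL
      rw [pvAdj_getD] at hw
      obtain ⟨e, hef, rfl⟩ := List.mem_map.1 hw
      obtain ⟨heE, heq⟩ := List.mem_filter.1 hef
      have : e.1 = u := by simpa using heq
      subst this
      exact ⟨e, heE, hne, rfl⟩
    · rintro ⟨e, heE, hne, rfl⟩
      have heb := hE e heE
      rw [List.mem_flatMap]
      refine ⟨(pvSccMapOf (pvP2 n (pvBuildMaps n ff ft).2 (pvP1 n (pvBuildMaps n ff ft).1).2).2).getD e.1 0, ?_, ?_⟩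
      · rw [hdagkeys]
        exact (PySem.List.mem_pyRange_one).2 (hcsr e.1 heb.1.1 heb.1.2)
      · rw [pvDagOf_getD]
        refine List.mem_map.2 ⟨((pvSccMapOf (pvP2 n (pvBuildMaps n ff ft).2 (pvP1 n (pvBuildMaps n ff ft).1).2).2).getD e.1 0, (pvSccMapOf (pvP2 n (pvBuildMaps n ff ft).2 (pvP1 n (pvBuildMaps n ff ft).1).2).2).getD e.2 0), ?_, rfl⟩
        refine List.mem_filter.2 ⟨?_, by simp⟩
        refine (pvLbig_mem _ _ _).2 ⟨e.1, ?_, e.2, ?_, hne, rfl⟩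
        · rw [hkeys]; exact (PySem.List.mem_pyRange_one).2 ⟨heb.1.1, heb.1.2⟩
        · rw [pvAdj_getD]
          refine List.mem_map.2 ⟨e, List.mem_filter.2 ⟨heE, by simp⟩, rfl⟩
  -- the indegree entries count exactly the incoming inter-component edges
  have hMbd : ∀ t ∈ (pvDagOf (pvBuildMaps n ff ft).1 (pvSccMapOf (pvP2 n (pvBuildMaps n ff ft).2 (pvP1 n (pvBuildMaps n ff ft).1).2).2) (((pvP2 n (pvBuildMaps n ff ft).2 (pvP1 n (pvBuildMaps n ff ft).1).2).2.length : Int))).keys.flatMap (fun j => (pvDagOf (pvBuildMaps n ff ft).1 (pvSccMapOf (pvP2 n (pvBuildMaps n ff ft).2 (pvP1 n (pvBuildMaps n ff ft).1).2).2) (((pvP2 n (pvBuildMaps n ff ft).2 (pvP1 n (pvBuildMaps n ff ft).1).2).2.length : Int))).getD j []), 0 ≤ t ∧ t < ((List.replicate n.toNat (0 : Int)).length : Int) := by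
    intro t ht
    obtain ⟨e, heE, hne, rfl⟩ := (hMmem t).1 ht
    have heb := hE e heE
    have h1 := hcsr e.2 heb.2.1 heb.2.2
    rw [List.length_replicate]
    constructor
    · exact h1.1
    · calc (pvSccMapOf (pvP2 n (pvBuildMaps n ff ft).2 (pvP1 n (pvBuildMaps n ff ft).1).2).2).getD e.2 0 < (((pvP2 n (pvBuildMaps n ff ft).2 (pvP1 n (pvBuildMaps n ff ft).1).2).2.length : Int)) := h1.2
        _ ≤ (n.toNat : Int) := by exact_mod_cast hlen2
  have hindeg0 : ∀ j : Int, 0 ≤ j → j < (((pvP2 n (pvBuildMaps n ff ft).2 (pvP1 n (pvBuildMaps n ff ft).1).2).2.length : Int)) →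
      (PySem.List.pyGetD (pvIndegOf (pvDagOf (pvBuildMaps n ff ft).1 (pvSccMapOf (pvP2 n (pvBuildMaps n ff ft).2 (pvP1 n (pvBuildMaps n ff ft).1).2).2) (((pvP2 n (pvBuildMaps n ff ft).2 (pvP1 n (pvBuildMaps n ff ft).1).2).2.length : Int))) n.toNat) j 0 = 0 ↔
        ¬ ∃ e ∈ ff.zip ft, (pvSccMapOf (pvP2 n (pvBuildMaps n ff ft).2 (pvP1 n (pvBuildMaps n ff ft).1).2).2).getD e.1 0 ≠ (pvSccMapOf (pvP2 n (pvBuildMaps n ff ft).2 (pvP1 n (pvBuildMaps n ff ft).1).2).2).getD e.2 0 ∧ (pvSccMapOf (pvP2 n (pvBuildMaps n ff ft).2 (pvP1 n (pvBuildMaps n ff ft).1).2).2).getD e.2 0 = j) := by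
    intro j hj0 hj1
    rw [pvIndegOf_eq]
    rw [pvIndegCount _ _ j hMbd hj0 (by rw [List.length_replicate]; omega)]
    have hz : PySem.List.pyGetD (List.replicate n.toNat (0 : Int)) j 0 = 0 := by
      have hjn : j.toNat < n.toNat := by omega
      rw [PySem.List.pyGetD_eq_getElem _ _ hj0 (by rw [List.length_replicate]; omega)]
      simp
    rw [hz, zero_add]
    constructor
    · intro h1 hex
      have hc : ((pvDagOf (pvBuildMaps n ff ft).1 (pvSccMapOf (pvP2 n (pvBuildMaps n ff ft).2 (pvP1 n (pvBuildMaps n ff ft).1).2).2) (((pvP2 n (pvBuildMaps n ff ft).2 (pvP1 n (pvBuildMaps n ff ft).1).2).2.length : Int))).keys.flatMap (fun j => (pvDagOf (pvBuildMaps n ff ft).1 (pvSccMapOf (pvP2 n (pvBuildMaps n ff ft).2 (pvP1 n (pvBuildMaps n ff ft).1).2).2) (((pvP2 n (pvBuildMaps n ff ft).2 (pvP1 n (pvBuildMaps n ff ft).1).2).2.length : Int))).getD j [])).count j = 0 := by exact_mod_cast h1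
      exact (List.count_eq_zero.1 hc) ((hMmem j).2 hex)
    · intro h1
      have hnm : j ∉ (pvDagOf (pvBuildMaps n ff ft).1 (pvSccMapOf (pvP2 n (pvBuildMaps n ff ft).2 (pvP1 n (pvBuildMaps n ff ft).1).2).2) (((pvP2 n (pvBuildMaps n ff ft).2 (pvP1 n (pvBuildMaps n ff ft).1).2).2.length : Int))).keys.flatMap (fun j => (pvDagOf (pvBuildMaps n ff ft).1 (pvSccMapOf (pvP2 n (pvBuildMaps n ff ft).2 (pvP1 n (pvBuildMaps n ff ft).1).2).2) (((pvP2 n (pvBuildMaps n ff ft).2 (pvP1 n (pvBuildMaps n ff ft).1).2).2.length : Int))).getD j []) := fun hh => h1 ((hMmem j).1 hh)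
      exact_mod_cast List.count_eq_zero.2 hnm
  -- unfold both ports and rewrite the pipelines into the characterized forms
  show minRunesToAdd n crystals ff ft = minRunesToAdd_alt n crystals ff ft
  simp only [minRunesToAdd, minRunesToAdd_alt, PySem.List.len_eq]
  rw [hA1, hB1, hA2, hB2]
  have hsmr : (PySem.List.enumerate ((pvP2 n (pvBuildMaps n ff ft).2 (pvP1 n (pvBuildMaps n ff ft).1).2).2) 0).foldl
      (fun d p => p.2.foldl (fun d node => d.insert node p.1) d) PySem.Dict.empty
      = pvSccMapOf (pvP2 n (pvBuildMaps n ff ft).2 (pvP1 n (pvBuildMaps n ff ft).1).2).2 := rfl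
  rw [hsmr]
  have hdagr : ((pvBuildMaps n ff ft).1).keys.foldl
      (fun dg node => (((pvBuildMaps n ff ft).1).getD node []).foldl
        (fun dg nei =>
          if (pvSccMapOf (pvP2 n (pvBuildMaps n ff ft).2 (pvP1 n (pvBuildMaps n ff ft).1).2).2).getD node 0 ≠ (pvSccMapOf (pvP2 n (pvBuildMaps n ff ft).2 (pvP1 n (pvBuildMaps n ff ft).1).2).2).getD nei 0
          then dg.modify ((pvSccMapOf (pvP2 n (pvBuildMaps n ff ft).2 (pvP1 n (pvBuildMaps n ff ft).1).2).2).getD node 0) [] (· ++ [(pvSccMapOf (pvP2 n (pvBuildMaps n ff ft).2 (pvP1 n (pvBuildMaps n ff ft).1).2).2).getD nei 0])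
          else dg) dg)
      (pvSeedDict (((pvP2 n (pvBuildMaps n ff ft).2 (pvP1 n (pvBuildMaps n ff ft).1).2).2.length : Int)))
      = pvDagOf (pvBuildMaps n ff ft).1 (pvSccMapOf (pvP2 n (pvBuildMaps n ff ft).2 (pvP1 n (pvBuildMaps n ff ft).1).2).2) (((pvP2 n (pvBuildMaps n ff ft).2 (pvP1 n (pvBuildMaps n ff ft).1).2).2.length : Int)) := rfl
  rw [hdagr]
  have hindr : (pvDagOf (pvBuildMaps n ff ft).1 (pvSccMapOf (pvP2 n (pvBuildMaps n ff ft).2 (pvP1 n (pvBuildMaps n ff ft).1).2).2) (((pvP2 n (pvBuildMaps n ff ft).2 (pvP1 n (pvBuildMaps n ff ft).1).2).2.length : Int))).keys.foldl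
      (fun ind node => ((pvDagOf (pvBuildMaps n ff ft).1 (pvSccMapOf (pvP2 n (pvBuildMaps n ff ft).2 (pvP1 n (pvBuildMaps n ff ft).1).2).2) (((pvP2 n (pvBuildMaps n ff ft).2 (pvP1 n (pvBuildMaps n ff ft).1).2).2.length : Int))).getD node []).foldl
        (fun ind nei => PySem.List.pySetD ind nei (PySem.List.pyGetD ind nei 0 + 1)) ind)
      (List.replicate n.toNat 0)
      = pvIndegOf (pvDagOf (pvBuildMaps n ff ft).1 (pvSccMapOf (pvP2 n (pvBuildMaps n ff ft).2 (pvP1 n (pvBuildMaps n ff ft).1).2).2) (((pvP2 n (pvBuildMaps n ff ft).2 (pvP1 n (pvBuildMaps n ff ft).1).2).2.length : Int))) n.toNat := rfl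
  rw [hindr, hdagkeys]
  -- both counting loops become countP over range(#sccs)
  have hswap : (PySem.List.pyRange 0 (((pvP2 n (pvBuildMaps n ff ft).2 (pvP1 n (pvBuildMaps n ff ft).1).2).2.length : Int)) 1).foldl
      (fun cnt i => if i ∈ crystals.foldl
          (fun bl c => PySem.Set.add bl ((pvSccMapOf (pvP2 n (pvBuildMaps n ff ft).2 (pvP1 n (pvBuildMaps n ff ft).1).2).2).getD c 0))
          ((ff.zip ft).foldl
            (fun bl e => if (pvSccMapOf (pvP2 n (pvBuildMaps n ff ft).2 (pvP1 n (pvBuildMaps n ff ft).1).2).2).getD e.1 0 ≠ (pvSccMapOf (pvP2 n (pvBuildMaps n ff ft).2 (pvP1 n (pvBuildMaps n ff ft).1).2).2).getD e.2 0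
              then PySem.Set.add bl ((pvSccMapOf (pvP2 n (pvBuildMaps n ff ft).2 (pvP1 n (pvBuildMaps n ff ft).1).2).2).getD e.2 0) else bl) PySem.Set.empty)
        then cnt else cnt + 1) (0 : Int)
      = (PySem.List.pyRange 0 (((pvP2 n (pvBuildMaps n ff ft).2 (pvP1 n (pvBuildMaps n ff ft).1).2).2.length : Int)) 1).foldl
      (fun cnt i => if i ∉ crystals.foldl
          (fun bl c => PySem.Set.add bl ((pvSccMapOf (pvP2 n (pvBuildMaps n ff ft).2 (pvP1 n (pvBuildMaps n ff ft).1).2).2).getD c 0))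
          ((ff.zip ft).foldl
            (fun bl e => if (pvSccMapOf (pvP2 n (pvBuildMaps n ff ft).2 (pvP1 n (pvBuildMaps n ff ft).1).2).2).getD e.1 0 ≠ (pvSccMapOf (pvP2 n (pvBuildMaps n ff ft).2 (pvP1 n (pvBuildMaps n ff ft).1).2).2).getD e.2 0
              then PySem.Set.add bl ((pvSccMapOf (pvP2 n (pvBuildMaps n ff ft).2 (pvP1 n (pvBuildMaps n ff ft).1).2).2).getD e.2 0) else bl) PySem.Set.empty)
        then cnt + 1 else cnt) (0 : Int) := by
    refine PySem.List.foldl_congr_mem _ _ _ _ (fun acc x _ => ?_)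
    by_cases h : x ∈ crystals.foldl
        (fun bl c => PySem.Set.add bl ((pvSccMapOf (pvP2 n (pvBuildMaps n ff ft).2 (pvP1 n (pvBuildMaps n ff ft).1).2).2).getD c 0))
        ((ff.zip ft).foldl
          (fun bl e => if (pvSccMapOf (pvP2 n (pvBuildMaps n ff ft).2 (pvP1 n (pvBuildMaps n ff ft).1).2).2).getD e.1 0 ≠ (pvSccMapOf (pvP2 n (pvBuildMaps n ff ft).2 (pvP1 n (pvBuildMaps n ff ft).1).2).2).getD e.2 0
            then PySem.Set.add bl ((pvSccMapOf (pvP2 n (pvBuildMaps n ff ft).2 (pvP1 n (pvBuildMaps n ff ft).1).2).2).getD e.2 0) else bl) PySem.Set.empty)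
    · rw [if_pos h, if_neg (fun hc => hc h)]
    · rw [if_neg h, if_pos h]
  rw [hswap]
  rw [PySem.List.foldl_ite_add_one, PySem.List.foldl_ite_add_one, zero_add, zero_add]
  have hcountp : ∀ x ∈ PySem.List.pyRange 0 (((pvP2 n (pvBuildMaps n ff ft).2 (pvP1 n (pvBuildMaps n ff ft).1).2).2.length : Int)) 1,
      (decide (PySem.List.pyGetD (pvIndegOf (pvDagOf (pvBuildMaps n ff ft).1 (pvSccMapOf (pvP2 n (pvBuildMaps n ff ft).2 (pvP1 n (pvBuildMaps n ff ft).1).2).2) (((pvP2 n (pvBuildMaps n ff ft).2 (pvP1 n (pvBuildMaps n ff ft).1).2).2.length : Int))) n.toNat) x 0 = 0 ∧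
        x ∉ crystals.foldl (fun s c => PySem.Set.add s ((pvSccMapOf (pvP2 n (pvBuildMaps n ff ft).2 (pvP1 n (pvBuildMaps n ff ft).1).2).2).getD c 0)) PySem.Set.empty) = true)
      ↔ (decide (x ∉ crystals.foldl
          (fun bl c => PySem.Set.add bl ((pvSccMapOf (pvP2 n (pvBuildMaps n ff ft).2 (pvP1 n (pvBuildMaps n ff ft).1).2).2).getD c 0))
          ((ff.zip ft).foldl
            (fun bl e => if (pvSccMapOf (pvP2 n (pvBuildMaps n ff ft).2 (pvP1 n (pvBuildMaps n ff ft).1).2).2).getD e.1 0 ≠ (pvSccMapOf (pvP2 n (pvBuildMaps n ff ft).2 (pvP1 n (pvBuildMaps n ff ft).1).2).2).getD e.2 0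
              then PySem.Set.add bl ((pvSccMapOf (pvP2 n (pvBuildMaps n ff ft).2 (pvP1 n (pvBuildMaps n ff ft).1).2).2).getD e.2 0) else bl) PySem.Set.empty)) = true) := by
    intro x hx
    have hxb := (PySem.List.mem_pyRange_one).1 hx
    simp only [decide_eq_true_eq]
    have hcc : x ∈ crystals.foldl (fun s c => PySem.Set.add s ((pvSccMapOf (pvP2 n (pvBuildMaps n ff ft).2 (pvP1 n (pvBuildMaps n ff ft).1).2).2).getD c 0)) PySem.Set.empty
        ↔ ∃ c ∈ crystals, x = (pvSccMapOf (pvP2 n (pvBuildMaps n ff ft).2 (pvP1 n (pvBuildMaps n ff ft).1).2).2).getD c 0 := by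
      rw [PySem.Set.mem_foldl_add]
      simp [PySem.Set.empty]
    have hbl1 : x ∈ (ff.zip ft).foldl
        (fun bl e => if (pvSccMapOf (pvP2 n (pvBuildMaps n ff ft).2 (pvP1 n (pvBuildMaps n ff ft).1).2).2).getD e.1 0 ≠ (pvSccMapOf (pvP2 n (pvBuildMaps n ff ft).2 (pvP1 n (pvBuildMaps n ff ft).1).2).2).getD e.2 0
          then PySem.Set.add bl ((pvSccMapOf (pvP2 n (pvBuildMaps n ff ft).2 (pvP1 n (pvBuildMaps n ff ft).1).2).2).getD e.2 0) else bl) PySem.Set.empty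
        ↔ ∃ e ∈ ff.zip ft, (pvSccMapOf (pvP2 n (pvBuildMaps n ff ft).2 (pvP1 n (pvBuildMaps n ff ft).1).2).2).getD e.1 0 ≠ (pvSccMapOf (pvP2 n (pvBuildMaps n ff ft).2 (pvP1 n (pvBuildMaps n ff ft).1).2).2).getD e.2 0 ∧ x = (pvSccMapOf (pvP2 n (pvBuildMaps n ff ft).2 (pvP1 n (pvBuildMaps n ff ft).1).2).2).getD e.2 0 := by
      rw [PySem.List.foldl_ite_eq_foldl_filter
        (p := fun (e : Int × Int) => (pvSccMapOf (pvP2 n (pvBuildMaps n ff ft).2 (pvP1 n (pvBuildMaps n ff ft).1).2).2).getD e.1 0 ≠ (pvSccMapOf (pvP2 n (pvBuildMaps n ff ft).2 (pvP1 n (pvBuildMaps n ff ft).1).2).2).getD e.2 0)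
        (f := fun bl (e : Int × Int) => PySem.Set.add bl ((pvSccMapOf (pvP2 n (pvBuildMaps n ff ft).2 (pvP1 n (pvBuildMaps n ff ft).1).2).2).getD e.2 0))]
      rw [PySem.Set.mem_foldl_add]
      simp only [PySem.Set.empty, List.not_mem_nil, false_or, List.mem_filter,
        decide_eq_true_eq]
      constructor
      · rintro ⟨e, ⟨heE, hne⟩, hxe⟩
        exact ⟨e, heE, hne, hxe⟩
      · rintro ⟨e, heE, hne, hxe⟩
        exact ⟨e, ⟨heE, hne⟩, hxe⟩
    have hbl : x ∈ crystals.foldl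
        (fun bl c => PySem.Set.add bl ((pvSccMapOf (pvP2 n (pvBuildMaps n ff ft).2 (pvP1 n (pvBuildMaps n ff ft).1).2).2).getD c 0))
        ((ff.zip ft).foldl
          (fun bl e => if (pvSccMapOf (pvP2 n (pvBuildMaps n ff ft).2 (pvP1 n (pvBuildMaps n ff ft).1).2).2).getD e.1 0 ≠ (pvSccMapOf (pvP2 n (pvBuildMaps n ff ft).2 (pvP1 n (pvBuildMaps n ff ft).1).2).2).getD e.2 0
            then PySem.Set.add bl ((pvSccMapOf (pvP2 n (pvBuildMaps n ff ft).2 (pvP1 n (pvBuildMaps n ff ft).1).2).2).getD e.2 0) else bl) PySem.Set.empty)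
        ↔ (∃ e ∈ ff.zip ft, (pvSccMapOf (pvP2 n (pvBuildMaps n ff ft).2 (pvP1 n (pvBuildMaps n ff ft).1).2).2).getD e.1 0 ≠ (pvSccMapOf (pvP2 n (pvBuildMaps n ff ft).2 (pvP1 n (pvBuildMaps n ff ft).1).2).2).getD e.2 0 ∧ x = (pvSccMapOf (pvP2 n (pvBuildMaps n ff ft).2 (pvP1 n (pvBuildMaps n ff ft).1).2).2).getD e.2 0)
          ∨ ∃ c ∈ crystals, x = (pvSccMapOf (pvP2 n (pvBuildMaps n ff ft).2 (pvP1 n (pvBuildMaps n ff ft).1).2).2).getD c 0 := by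
      rw [PySem.Set.mem_foldl_add, hbl1]
    rw [hcc, hbl, hindeg0 x hxb.1 hxb.2]
    constructor
    · rintro ⟨h1, h2⟩ (⟨e, heE, hne, hxe⟩ | h3)
      · exact h1 ⟨e, heE, hne, hxe.symm⟩
      · exact h2 h3
    · intro h
      refine ⟨?_, ?_⟩
      · rintro ⟨e, heE, hne, hxe⟩
        exact h (Or.inl ⟨e, heE, hne, hxe.symm⟩)
      · intro h3
        exact h (Or.inr h3)
  exact_mod_cast congrArg (fun (k : Nat) => (k : Int)) (List.countP_congr hcountp)
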